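-- pv_equiv track=rewrite | github.com/JIE77777/Wagstaff-Lab | core/sim/farming_planner.py | _largest_cluster
-- ===== SOURCE A (Python) =====
-- from typing import Any, Dict, Iterable, List, Optional, Sequence, Tuple
--
-- def _largest_cluster(layout: List[List[str]]) -> Dict[str, int]:
--     if not layout:
--         return {}
--     h = len(layout)
--     w = len(layout[0])
--     seen = [[False] * w for _ in range(h)]
--     best: Dict[str, int] = {}
--
--     for y in range(h):
--         for x in range(w):
--             if seen[y][x]:
--                 continue
--             pid = layout[y][x]
--             if not pid:
--                 continue
--             stack = [(x, y)]
--             seen[y][x] = True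
--             size = 0
--             while stack:
--                 cx, cy = stack.pop()
--                 size += 1
--                 for nx, ny in ((cx - 1, cy), (cx + 1, cy), (cx, cy - 1), (cx, cy + 1)):
--                     if 0 <= nx < w and 0 <= ny < h and not seen[ny][nx] and layout[ny][nx] == pid:
--                         seen[ny][nx] = True
--                         stack.append((nx, ny))
--             best[pid] = max(best.get(pid, 0), size)
--     return best
-- ===== SOURCE B (Python) =====
-- from typing import Dict, List
--
--
-- def _merge(label: List[int], members: Dict[int, List[int]], i: int, j: int) -> None:
--     la, lb = label[i], label[j]
--     if la == lb:
--         return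
--     for c in members[lb]:
--         label[c] = la
--     members[la].extend(members.pop(lb))
--
--
-- def _largest_cluster(layout: List[List[str]]) -> Dict[str, int]:
--     if not layout:
--         return {}
--     h = len(layout)
--     w = len(layout[0])
--     label = list(range(h * w))
--     members = {i: [i] for i in range(h * w)}
--     for y in range(h):
--         for x in range(w):
--             pid = layout[y][x]
--             if not pid:
--                 continue
--             i = y * w + x
--             if x + 1 < w and layout[y][x + 1] == pid:
--                 _merge(label, members, i, i + 1)
--             if y + 1 < h and layout[y + 1][x] == pid:
--                 _merge(label, members, i, i + w)
--     best: Dict[str, int] = {}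
--     for y in range(h):
--         for x in range(w):
--             pid = layout[y][x]
--             if pid:
--                 best[pid] = max(best.get(pid, 0), len(members[label[y * w + x]]))
--     return best
-- ===== Notes on version B (the rewrite author's own statement) =====
-- stated objective: alternative
-- what changed: Replaces the seen-matrix stack flood fill with disjoint-set merging by relabeling: every cell starts as a singleton component, right/down same-id neighbours merge their labelled member lists, and a final row-major pass maxes each id's component size into the dict.
import Mathlib
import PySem

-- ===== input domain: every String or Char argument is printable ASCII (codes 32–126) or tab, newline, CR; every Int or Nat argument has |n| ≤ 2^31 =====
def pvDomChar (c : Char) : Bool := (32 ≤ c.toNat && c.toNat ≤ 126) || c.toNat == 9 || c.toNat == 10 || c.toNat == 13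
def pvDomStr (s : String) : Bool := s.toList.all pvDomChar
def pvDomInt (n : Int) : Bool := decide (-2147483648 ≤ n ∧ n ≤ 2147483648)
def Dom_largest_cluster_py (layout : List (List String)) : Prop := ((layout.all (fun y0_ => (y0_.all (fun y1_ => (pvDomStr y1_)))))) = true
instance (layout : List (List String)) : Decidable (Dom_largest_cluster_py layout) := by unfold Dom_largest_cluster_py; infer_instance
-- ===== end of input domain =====

-- B replaces A's seen-matrix stack flood fill by disjoint-set merging of labelled member
-- lists over right/down same-id edges (equivalence proved for the returned dict; A and B
-- mutate nothing observable).  Objective: alternative algorithm, not claimed faster.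

-- ===== PORT A =====
-- layout[ny][nx] (used only under the bounds guards A itself checks)
def pvCellI (layout : List (List String)) (ny nx : Int) : String :=
  (layout.getD ny.toNat []).getD nx.toNat ""

-- seen[ny][nx]
def pvSeenAt (sn : List (List Bool)) (ny nx : Int) : Bool :=
  (sn.getD ny.toNat []).getD nx.toNat false

-- seen[ny][nx] = True
def pvSetSeen (sn : List (List Bool)) (ny nx : Int) : List (List Bool) :=
  sn.set ny.toNat ((sn.getD ny.toNat []).set nx.toNat true)

-- the `while stack:` loop of A (fuel-bounded; h*w+1 steps always suffice)
def pvFloodA (layout : List (List String)) (w h : Int) (pid : String) :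
    Nat → List (Int × Int) → List (List Bool) → Int → List (List Bool) × Int
  | 0, _, seen, size => (seen, size)
  | _ + 1, [], seen, size => (seen, size)
  | fuel + 1, (cx, cy) :: rest, seen, size =>
      let s := [(cx - 1, cy), (cx + 1, cy), (cx, cy - 1), (cx, cy + 1)].foldl
        (fun (s : List (Int × Int) × List (List Bool)) nb =>
          if 0 ≤ nb.1 ∧ nb.1 < w ∧ 0 ≤ nb.2 ∧ nb.2 < h ∧
              ¬ pvSeenAt s.2 nb.2 nb.1 = true ∧ pvCellI layout nb.2 nb.1 = pid
          then (nb :: s.1, pvSetSeen s.2 nb.2 nb.1) else s) (rest, seen)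
      pvFloodA layout w h pid fuel s.1 s.2 (size + 1)

def largest_cluster_py (layout : List (List String)) : List (String × Int) :=
  if layout = [] then [] else
    let h := layout.length
    let w := (layout.headD []).length
    let res := (List.range h).foldl (fun st (y : Nat) =>
      (List.range w).foldl (fun (st : List (List Bool) × PySem.Dict String Int) (x : Nat) =>
        if pvSeenAt st.1 (y : Int) (x : Int) then st
        else
          let pid := (layout.getD y []).getD x ""
          if pid = "" then st
          else
            let r := pvFloodA layout w h pid (h * w + 1) [((x : Int), (y : Int))]
              (pvSetSeen st.1 (y : Int) (x : Int)) 0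
            (r.1, st.2.insert pid (max (st.2.getD pid 0) r.2))) st)
      (List.replicate h (List.replicate w false), PySem.Dict.empty)
    res.2.items

-- ===== PORT B =====
-- _merge(label, members, i, j)
def pvMergeB (label : List Nat) (members : PySem.Dict Nat (List Nat)) (i j : Nat) :
    List Nat × PySem.Dict Nat (List Nat) :=
  let la := label.getD i 0
  let lb := label.getD j 0
  if la = lb then (label, members)
  else
    let mb := members.getD lb []
    (mb.foldl (fun lab c => lab.set c la) label,
     (members.insert la (members.getD la [] ++ mb)).erase lb)

def largest_cluster_py_alt (layout : List (List String)) : List (String × Int) :=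
  if layout = [] then [] else
    let h := layout.length
    let w := (layout.headD []).length
    let st := (List.range h).foldl (fun st y =>
      (List.range w).foldl (fun (st : List Nat × PySem.Dict Nat (List Nat)) x =>
        let pid := (layout.getD y []).getD x ""
        if pid = "" then st
        else
          let i := y * w + x
          let st1 := if x + 1 < w ∧ (layout.getD y []).getD (x + 1) "" = pid then
              pvMergeB st.1 st.2 i (i + 1) else st
          if y + 1 < h ∧ (layout.getD (y + 1) []).getD x "" = pid then
            pvMergeB st1.1 st1.2 i (i + w) else st1) st)
      (List.range (h * w), (List.range (h * w)).foldl (fun d i => d.insert i [i]) PySem.Dict.empty)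
    let best := (List.range h).foldl (fun b y =>
      (List.range w).foldl (fun (b : PySem.Dict String Int) x =>
        let pid := (layout.getD y []).getD x ""
        if pid = "" then b
        else b.insert pid (max (b.getD pid 0)
          ((st.2.getD (st.1.getD (y * w + x) 0) []).length : Int))) b)
      PySem.Dict.empty
    best.items

-- ===== PRECONDITION & SPEC =====
-- Pre_ excludes jagged layouts whose later rows are shorter than row 0: there A (and B)
-- raise IndexError reading layout[y][x] for x in range(len(layout[0])).
def Pre_largest_cluster_py (layout : List (List String)) : Prop :=
  ∀ row ∈ layout, (layout.headD []).length ≤ row.length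
instance (layout : List (List String)) : Decidable (Pre_largest_cluster_py layout) := by
  unfold Pre_largest_cluster_py; infer_instance
def pvWitness_largest_cluster_py : List (List String) := [["a", "a"], ["", "a"]]

def Spec_largest_cluster_py (layout : List (List String)) (out : List (String × Int)) : Prop := out = largest_cluster_py_alt layout
instance (layout : List (List String)) (out : List (String × Int)) : Decidable (Spec_largest_cluster_py layout out) := by unfold Spec_largest_cluster_py; infer_instance

-- ===== CLAIM (what is proved, stated in full; the proofs are below) =====
def Claim_equal_largest_cluster_py : Prop := ∀ (layout : List (List String)), Dom_largest_cluster_py layout → Pre_largest_cluster_py layout → Spec_largest_cluster_py layout (largest_cluster_py layout)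

-- ===== LEMMAS AND PROOFS =====

/- ---------- generic helpers ---------- -/

theorem pvFind?_filter_ne {κ ν : Type} [BEq κ] [LawfulBEq κ]
    (l : List (κ × ν)) (k c : κ) (h : c ≠ k) :
    (l.filter (fun p => !p.1 == k)).find? (fun p => p.1 == c) = l.find? (fun p => p.1 == c) := by
  induction l with
  | nil => rfl
  | cons p t ih =>
    by_cases hp : p.1 = k
    · have h1 : (!p.1 == k) = false := by simp [hp]
      have h2 : (p.1 == c) = false := by simp [hp]; exact fun e => h e.symm
      simp [List.filter_cons, List.find?_cons, h1, h2, ih]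
    · have h1 : (!p.1 == k) = true := by simp [hp]
      by_cases hc : p.1 = c
      · rw [show List.filter (fun p => !p.1 == k) (p :: t) = p :: List.filter (fun p => !p.1 == k) t from by simp [List.filter_cons, h1]]
        simp [List.find?_cons, hc]
      · simp [List.filter_cons, List.find?_cons, h1, hc, ih]

theorem pvDict_get?_erase_of_ne {κ ν : Type} [BEq κ] [LawfulBEq κ]
    (d : PySem.Dict κ ν) (k c : κ) (h : c ≠ k) : (d.erase k).get? c = d.get? c := by
  show ((d.items.filter (fun p => !p.1 == k)).find? (fun p => p.1 == c)).map (fun x => x.2)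
      = (d.items.find? (fun p => p.1 == c)).map (fun x => x.2)
  rw [pvFind?_filter_ne _ _ _ h]

theorem pvEqvGen_congr {E F : Nat → Nat → Prop} (h : ∀ i j, E i j ↔ F i j) {x y : Nat} :
    Relation.EqvGen E x y ↔ Relation.EqvGen F x y :=
  ⟨Relation.EqvGen.mono (fun a b hab => (h a b).mp hab),
   Relation.EqvGen.mono (fun a b hab => (h a b).mpr hab)⟩

theorem pvEqvGen_empty {x y : Nat} :
    Relation.EqvGen (fun _ _ : Nat => False) x y ↔ x = y := by
  constructor
  · intro h
    induction h with
    | rel _ _ h => exact h.elim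
    | refl => rfl
    | symm _ _ _ ih => exact ih.symm
    | trans _ _ _ _ _ ih1 ih2 => exact ih1.trans ih2
  · rintro rfl; exact Relation.EqvGen.refl x

def pvJoin (R : Nat → Nat → Prop) (a b x y : Nat) : Prop :=
  R x y ∨ (R x a ∧ R b y) ∨ (R x b ∧ R a y)

theorem pvEqvGen_union_pair (E : Nat → Nat → Prop) (a b x y : Nat) :
    Relation.EqvGen (fun i j => E i j ∨ (i = a ∧ j = b)) x y ↔
      pvJoin (Relation.EqvGen E) a b x y := by
  constructor
  · intro h
    induction h with
    | rel i j h =>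
      rcases h with h | ⟨rfl, rfl⟩
      · exact Or.inl (Relation.EqvGen.rel _ _ h)
      · exact Or.inr (Or.inl ⟨Relation.EqvGen.refl _, Relation.EqvGen.refl _⟩)
    | refl => exact Or.inl (Relation.EqvGen.refl _)
    | symm u v _ ih =>
      rcases ih with h | ⟨h1, h2⟩ | ⟨h1, h2⟩
      · exact Or.inl (Relation.EqvGen.symm _ _ h)
      · exact Or.inr (Or.inr ⟨Relation.EqvGen.symm _ _ h2, Relation.EqvGen.symm _ _ h1⟩)
      · exact Or.inr (Or.inl ⟨Relation.EqvGen.symm _ _ h2, Relation.EqvGen.symm _ _ h1⟩)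
    | trans u v z _ _ ih1 ih2 =>
      rcases ih1 with h | ⟨h1, h2⟩ | ⟨h1, h2⟩ <;>
        rcases ih2 with h' | ⟨h1', h2'⟩ | ⟨h1', h2'⟩
      · exact Or.inl (Relation.EqvGen.trans _ _ _ h h')
      · exact Or.inr (Or.inl ⟨Relation.EqvGen.trans _ _ _ h h1', h2'⟩)
      · exact Or.inr (Or.inr ⟨Relation.EqvGen.trans _ _ _ h h1', h2'⟩)
      · exact Or.inr (Or.inl ⟨h1, Relation.EqvGen.trans _ _ _ h2 h'⟩)
      · exact Or.inl (Relation.EqvGen.trans _ _ _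
          (Relation.EqvGen.trans _ _ _ h1
            (Relation.EqvGen.symm _ _ (Relation.EqvGen.trans _ _ _ h2 h1'))) h2')
      · exact Or.inl (Relation.EqvGen.trans _ _ _ h1 h2')
      · exact Or.inr (Or.inr ⟨h1, Relation.EqvGen.trans _ _ _ h2 h'⟩)
      · exact Or.inl (Relation.EqvGen.trans _ _ _ h1 h2')
      · exact Or.inr (Or.inl ⟨Relation.EqvGen.trans _ _ _ h1
          (Relation.EqvGen.symm _ _ (Relation.EqvGen.trans _ _ _ h2 h1')),
          Relation.EqvGen.trans _ _ _
            (Relation.EqvGen.symm _ _ (Relation.EqvGen.trans _ _ _ h2 h1')) h2'⟩)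
  · intro h
    have mono : ∀ {p q : Nat}, Relation.EqvGen E p q →
        Relation.EqvGen (fun i j => E i j ∨ (i = a ∧ j = b)) p q :=
      fun h => Relation.EqvGen.mono (fun _ _ hab => Or.inl hab) h
    have hab : Relation.EqvGen (fun i j => E i j ∨ (i = a ∧ j = b)) a b :=
      Relation.EqvGen.rel _ _ (Or.inr ⟨rfl, rfl⟩)
    rcases h with h | ⟨h1, h2⟩ | ⟨h1, h2⟩
    · exact mono h
    · exact Relation.EqvGen.trans _ _ _ (mono h1) (Relation.EqvGen.trans _ _ _ hab (mono h2))
    · exact Relation.EqvGen.trans _ _ _ (mono h1)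
        (Relation.EqvGen.trans _ _ _ (Relation.EqvGen.symm _ _ hab) (mono h2))

/- ---------- the grid graph ---------- -/

-- value of cell i (row i / w, column i % w)
def pvG (layout : List (List String)) (w : Nat) : Nat → String :=
  fun i => (layout.getD (i / w) []).getD (i % w) ""

-- right/down same-id edge between in-range nonempty cells
def pvEdge (g : Nat → String) (w n : Nat) (i j : Nat) : Prop :=
  i < n ∧ j < n ∧ g i ≠ "" ∧ g i = g j ∧ ((j = i + 1 ∧ i % w + 1 < w) ∨ j = i + w)

def pvAdj (g : Nat → String) (w n : Nat) (i j : Nat) : Prop :=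
  pvEdge g w n i j ∨ pvEdge g w n j i

def pvReach (g : Nat → String) (w n : Nat) (i j : Nat) : Prop :=
  Relation.ReflTransGen (pvAdj g w n) i j

noncomputable def pvComp (g : Nat → String) (w n : Nat) (i : Nat) : Finset Nat :=
  @Finset.filter _ (fun j => pvReach g w n i j) (Classical.decPred _) (Finset.range n)

theorem pvAdj_symm {g w n} {i j : Nat} (h : pvAdj g w n i j) : pvAdj g w n j i := h.symm

theorem pvReach_symm {g w n} {i j : Nat} (h : pvReach g w n i j) : pvReach g w n j i :=
  Relation.ReflTransGen.symmetric (fun _ _ => pvAdj_symm) h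

theorem pvAdj_id {g w n} {i j : Nat} (h : pvAdj g w n i j) : g i = g j := by
  rcases h with ⟨_, _, _, h, _⟩ | ⟨_, _, _, h, _⟩
  · exact h
  · exact h.symm

theorem pvAdj_lt {g w n} {i j : Nat} (h : pvAdj g w n i j) : i < n ∧ j < n := by
  rcases h with ⟨h1, h2, _⟩ | ⟨h1, h2, _⟩ <;> exact ⟨by omega, by omega⟩

theorem pvReach_id {g w n} {i j : Nat} (h : pvReach g w n i j) : g i = g j := by
  induction h with
  | refl => rfl
  | tail _ h ih => exact ih.trans (pvAdj_id h)

theorem pvReach_lt {g w n} {i j : Nat} (hi : i < n) (h : pvReach g w n i j) : j < n := by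
  induction h with
  | refl => exact hi
  | tail _ h _ => exact (pvAdj_lt h).2

theorem pvMem_comp {g w n} {i j : Nat} :
    j ∈ pvComp g w n i ↔ j < n ∧ pvReach g w n i j := by
  simp [pvComp, Finset.mem_filter, Finset.mem_range, and_comm]

theorem pvSelf_mem_comp {g w n} {i : Nat} (hi : i < n) : i ∈ pvComp g w n i :=
  pvMem_comp.mpr ⟨hi, Relation.ReflTransGen.refl⟩

theorem pvComp_eq_of_reach {g w n} {i j : Nat} (h : pvReach g w n i j) :
    pvComp g w n i = pvComp g w n j := by
  ext t
  simp only [pvMem_comp]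
  exact ⟨fun ⟨ht, hr⟩ => ⟨ht, (pvReach_symm h).trans hr⟩, fun ⟨ht, hr⟩ => ⟨ht, h.trans hr⟩⟩

theorem pvComp_card_le {g w n} (i : Nat) : (pvComp g w n i).card ≤ n := by
  have : pvComp g w n i ⊆ Finset.range n := by
    intro t ht; exact Finset.mem_range.mpr (pvMem_comp.mp ht).1
  simpa using Finset.card_le_card this

-- walking back along a path out of an Adj-closed set
theorem pvClosed_back {g w n} {S : Finset Nat}
    (hS : ∀ i ∈ S, ∀ j, pvAdj g w n i j → j ∈ S) {x y : Nat}
    (h : pvReach g w n x y) (hy : y ∈ S) : x ∈ S := by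
  induction h with
  | refl => exact hy
  | tail hxa ha ih => exact ih (hS _ hy _ (pvAdj_symm ha))

-- EqvGen of the one-directional edges is two-directional reachability
theorem pvEqvGen_edge_iff_reach {g w n} {i j : Nat} :
    Relation.EqvGen (pvEdge g w n) i j ↔ pvReach g w n i j := by
  constructor
  · intro h
    induction h with
    | rel _ _ h => exact Relation.ReflTransGen.single (Or.inl h)
    | refl => exact Relation.ReflTransGen.refl
    | symm _ _ _ ih => exact pvReach_symm ih
    | trans _ _ _ _ _ ih1 ih2 => exact ih1.trans ih2
  · intro h
    induction h with
    | refl => exact Relation.EqvGen.refl _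
    | tail _ ha ih =>
      rcases ha with h | h
      · exact Relation.EqvGen.trans _ _ _ ih (Relation.EqvGen.rel _ _ h)
      · exact Relation.EqvGen.trans _ _ _ ih
          (Relation.EqvGen.symm _ _ (Relation.EqvGen.rel _ _ h))



/- ---------- index arithmetic ---------- -/

theorem pvEnc_div {y x w : Nat} (hx : x < w) : (y * w + x) / w = y ∧ (y * w + x) % w = x := by
  have hw : 0 < w := lt_of_le_of_lt (Nat.zero_le x) hx
  constructor
  · have h : y * w + x = x + w * y := by ring
    rw [h, Nat.add_mul_div_left _ _ hw, Nat.div_eq_of_lt hx]; omega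
  · have h : y * w + x = x + y * w := by ring
    rw [h, Nat.add_mul_mod_self_right, Nat.mod_eq_of_lt hx]

theorem pvEnc_lt {y x w hh : Nat} (hy : y < hh) (hx : x < w) : y * w + x < hh * w := by
  have h1 : y * w + x < (y + 1) * w := by nlinarith
  have h2 : (y + 1) * w ≤ hh * w := Nat.mul_le_mul_right w hy
  omega

theorem pvEnc_inj {y x y' x' w : Nat} (hx : x < w) (hx' : x' < w)
    (h : y * w + x = y' * w + x') : y = y' ∧ x = x' := by
  have h1 := pvEnc_div (y := y) hx
  have h2 := pvEnc_div (y := y') hx'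
  rw [h] at h1
  exact ⟨h1.1.symm.trans h2.1, h1.2.symm.trans h2.2⟩

theorem pvDec {i w hh : Nat} (hw : 0 < w) (hi : i < hh * w) :
    i / w < hh ∧ i % w < w ∧ (i / w) * w + i % w = i := by
  refine ⟨(Nat.div_lt_iff_lt_mul hw).mpr hi, Nat.mod_lt _ hw, ?_⟩
  have h1 := Nat.div_add_mod i w
  have h2 : (i / w) * w = w * (i / w) := Nat.mul_comm _ _
  omega

/- ---------- reshaping the double loop ---------- -/

theorem pvDoubleFold {σ : Type} (f : σ → Nat → Nat → σ) (hh w : Nat) (init : σ) :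
    (List.range hh).foldl (fun st y => (List.range w).foldl (fun st x => f st y x) st) init
      = (List.range (hh * w)).foldl (fun st i => f st (i / w) (i % w)) init := by
  induction hh generalizing init with
  | zero => simp
  | succ m ih =>
    rw [List.range_succ, List.foldl_append, ih]
    have h : List.range ((m + 1) * w) = List.range (m * w) ++ (List.range w).map (fun x => m * w + x) := by
      have : (m + 1) * w = m * w + w := by ring
      rw [this, List.range_add]
    rw [h, List.foldl_append, List.foldl_cons, List.foldl_nil, List.foldl_map]
    apply PySem.List.foldl_congr_mem'
    intro x hx acc
    have hxw : x < w := List.mem_range.mp hx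
    have h1 : m * w + x = x + w * m := by ring
    rcases pvEnc_div (y := m) hxw with ⟨hd, hm⟩
    rw [hd, hm]

/- ---------- list utilities ---------- -/

theorem pvGetD_range {n i : Nat} (hi : i < n) : (List.range n).getD i 0 = i := by
  rw [List.getD_eq_getElem?_getD, List.getElem?_range hi]; rfl

theorem pvFoldlSet_length (L lab : List Nat) (v : Nat) :
    (L.foldl (fun l c => l.set c v) lab).length = lab.length := by
  induction L generalizing lab with
  | nil => rfl
  | cons c T ih => rw [List.foldl_cons, ih, List.length_set]

theorem pvGetD_set {α : Type} (lab : List α) (c : Nat) (v : α) (t : Nat) (d : α) :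
    (lab.set c v).getD t d = if t = c ∧ t < lab.length then v else lab.getD t d := by
  by_cases ht : t < lab.length
  · rw [List.getD_eq_getElem?_getD, List.getElem?_set]
    by_cases he : c = t
    · subst he; simp [ht, List.getD_eq_getElem?_getD]
    · simp [he, List.getD_eq_getElem?_getD, Ne.symm he]
  · have h1 : (lab.set c v).getD t d = d := by
      rw [List.getD_eq_getElem?_getD, List.getElem?_eq_none (by simpa using ht)]; rfl
    have h2 : lab.getD t d = d := by
      rw [List.getD_eq_getElem?_getD, List.getElem?_eq_none (by omega)]; rfl
    simp [h1, h2, ht]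

theorem pvFoldlSet_getD (L lab : List Nat) (v t : Nat) :
    (L.foldl (fun l c => l.set c v) lab).getD t 0
      = if t ∈ L ∧ t < lab.length then v else lab.getD t 0 := by
  induction L generalizing lab with
  | nil => simp
  | cons c T ih =>
    rw [List.foldl_cons, ih, List.length_set, pvGetD_set _ _ _ _ (0 : Nat)]
    by_cases hlt : t < lab.length
    · simp only [hlt, and_true, List.mem_cons]
      split_ifs <;> tauto
    · simp [hlt]

/- ---------- the seen matrix ---------- -/

def pvSeenInv (hh w : Nat) (sn : List (List Bool)) (S : Finset Nat) : Prop :=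
  sn.length = hh ∧ (∀ r ∈ sn, r.length = w) ∧
  ∀ y x : Nat, y < hh → x < w → (((sn.getD y []).getD x false) = true ↔ y * w + x ∈ S)

theorem pvSeenInv_init (hh w : Nat) :
    pvSeenInv hh w (List.replicate hh (List.replicate w false)) ∅ := by
  refine ⟨by simp, fun r hr => by simp [List.eq_of_mem_replicate hr], ?_⟩
  intro y x hy hx
  have h1 : (List.replicate hh (List.replicate w false)).getD y [] = List.replicate w false := by
    rw [List.getD_eq_getElem?_getD, List.getElem?_replicate]; simp [hy]
  have h2 : (List.replicate w false).getD x false = false := by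
    rw [List.getD_eq_getElem?_getD, List.getElem?_replicate]; simp [hx]
  rw [h1, h2]
  simp

theorem pvRow_len {hh w : Nat} {sn : List (List Bool)} {S : Finset Nat}
    (hsn : pvSeenInv hh w sn S) {y : Nat} (hy : y < hh) : (sn.getD y []).length = w := by
  obtain ⟨hlen, hrows, -⟩ := hsn
  have hylen : y < sn.length := by omega
  rw [List.getD_eq_getElem?_getD, List.getElem?_eq_getElem hylen]
  exact hrows _ (List.getElem_mem _)

theorem pvSeenAt_iff {hh w : Nat} {sn : List (List Bool)} {S : Finset Nat}
    (hsn : pvSeenInv hh w sn S) {y x : Nat} (hy : y < hh) (hx : x < w) :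
    (pvSeenAt sn (y : Int) (x : Int) = true) ↔ y * w + x ∈ S := by
  have h : pvSeenAt sn (y : Int) (x : Int) = ((sn.getD y []).getD x false) := by
    simp [pvSeenAt]
  rw [h]
  exact hsn.2.2 y x hy hx

theorem pvSetSeen_inv {hh w : Nat} {sn : List (List Bool)} {S : Finset Nat}
    (hsn : pvSeenInv hh w sn S) {y x : Nat} (hy : y < hh) (hx : x < w) :
    pvSeenInv hh w (pvSetSeen sn (y : Int) (x : Int)) (insert (y * w + x) S) := by
  have hrl := pvRow_len hsn hy
  obtain ⟨hlen, hrows, hmem⟩ := hsn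
  have hset : pvSetSeen sn (y : Int) (x : Int) = sn.set y ((sn.getD y []).set x true) := by
    simp [pvSetSeen]
  rw [hset]
  refine ⟨by simp [hlen], ?_, ?_⟩
  · intro r hr
    rcases List.mem_or_eq_of_mem_set hr with hr | rfl
    · exact hrows r hr
    · rw [List.length_set]; exact hrl
  · intro y' x' hy' hx'
    have hylen : y < sn.length := by omega
    by_cases hyy : y' = y
    · subst hyy
      have hgy : (sn.set y' ((sn.getD y' []).set x true)).getD y' []
          = (sn.getD y' []).set x true := by
        rw [List.getD_eq_getElem?_getD, List.getElem?_set_self (by omega)]; rfl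
      rw [hgy, pvGetD_set, hrl]
      by_cases hxx : x' = x
      · subst hxx; simp [hx']
      · have hne : y' * w + x' ≠ y' * w + x := by omega
        simp only [hxx, false_and, if_false]
        rw [Finset.mem_insert]
        simp only [hne, false_or]
        exact hmem y' x' hy' hx'
    · have hgy : (sn.set y ((sn.getD y []).set x true)).getD y' [] = sn.getD y' [] := by
        rw [List.getD_eq_getElem?_getD, List.getElem?_set_ne (by omega), ← List.getD_eq_getElem?_getD]
      rw [hgy]
      have hne : y' * w + x' ≠ y * w + x := fun h => hyy (pvEnc_inj hx' hx h).1
      rw [Finset.mem_insert]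
      simp only [hne, false_or]
      exact hmem y' x' hy' hx'

/- ---------- coordinates ↔ indices ---------- -/

def pvToIdx (w : Nat) (p : Int × Int) : Nat := p.2.toNat * w + p.1.toNat

theorem pvCellI_eq (layout : List (List String)) (w : Nat) (nb : Int × Int)
    (h0 : 0 ≤ nb.1) (hx : nb.1 < (w : Int)) :
    pvCellI layout nb.2 nb.1 = pvG layout w (pvToIdx w nb) := by
  have hxw : nb.1.toNat < w := by omega
  rcases pvEnc_div (y := nb.2.toNat) hxw with ⟨hd, hm⟩
  simp [pvCellI, pvG, pvToIdx, hd, hm]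

/- ---------- the four neighbours ---------- -/

theorem pvNb_adj (g : Nat → String) (w hh : Nat) {cx cy : Int}
    (hcx0 : 0 ≤ cx) (hcxw : cx < (w : Int)) (hcy0 : 0 ≤ cy) (hcyh : cy < (hh : Int))
    (hgq : g (pvToIdx w (cx, cy)) ≠ "")
    (nb : Int × Int) (hnb : nb ∈ [(cx - 1, cy), (cx + 1, cy), (cx, cy - 1), (cx, cy + 1)])
    (hb1 : 0 ≤ nb.1) (hbw : nb.1 < (w : Int)) (hb2 : 0 ≤ nb.2) (hbh : nb.2 < (hh : Int))
    (hid : g (pvToIdx w nb) = g (pvToIdx w (cx, cy))) :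
    pvAdj g w (hh * w) (pvToIdx w (cx, cy)) (pvToIdx w nb) := by
  have ha : cx.toNat < w := by omega
  have hb : cy.toNat < hh := by omega
  have hqe : pvToIdx w (cx, cy) = cy.toNat * w + cx.toNat := rfl
  have hq : pvToIdx w (cx, cy) < hh * w := by rw [hqe]; exact pvEnc_lt hb ha
  have hqm : (cy.toNat * w + cx.toNat) % w = cx.toNat := (pvEnc_div ha).2
  simp only [List.mem_cons, List.mem_singleton, List.not_mem_nil, or_false] at hnb
  rcases hnb with rfl | rfl | rfl | rfl <;> dsimp only at hb1 hbw hb2 hbh hid ⊢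
  · -- left neighbour (cx - 1, cy)
    have ha1 : 1 ≤ cx.toNat := by omega
    have hts : (cx - 1).toNat = cx.toNat - 1 := by omega
    have hidx : pvToIdx w (cx - 1, cy) = cy.toNat * w + (cx.toNat - 1) := by
      show cy.toNat * w + (cx - 1).toNat = _
      rw [hts]
    rw [hidx] at hid ⊢
    have hjm : (cy.toNat * w + (cx.toNat - 1)) % w = cx.toNat - 1 := (pvEnc_div (by omega)).2
    refine Or.inr ⟨by exact pvEnc_lt hb (by omega), hq, by rw [hid]; exact hgq, hid, Or.inl ⟨?_, ?_⟩⟩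
    · rw [hqe]; omega
    · rw [hjm]; omega
  · -- right neighbour (cx + 1, cy)
    have haw : cx.toNat + 1 < w := by omega
    have hts : (cx + 1).toNat = cx.toNat + 1 := by omega
    have hidx : pvToIdx w (cx + 1, cy) = cy.toNat * w + (cx.toNat + 1) := by
      show cy.toNat * w + (cx + 1).toNat = _
      rw [hts]
    rw [hidx] at hid ⊢
    refine Or.inl ⟨hq, by exact pvEnc_lt hb haw, hgq, hid.symm, Or.inl ⟨?_, ?_⟩⟩
    · rw [hqe]; omega
    · rw [hqe, hqm]; omega
  · -- up neighbour (cx, cy - 1)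
    have hb1' : 1 ≤ cy.toNat := by omega
    have hts : (cy - 1).toNat = cy.toNat - 1 := by omega
    have hidx : pvToIdx w (cx, cy - 1) = (cy.toNat - 1) * w + cx.toNat := by
      show (cy - 1).toNat * w + cx.toNat = _
      rw [hts]
    have hmul : (cy.toNat - 1) * w + w = cy.toNat * w := by
      have h1 : cy.toNat - 1 + 1 = cy.toNat := by omega
      calc (cy.toNat - 1) * w + w = (cy.toNat - 1 + 1) * w := (Nat.succ_mul _ _).symm
        _ = cy.toNat * w := by rw [h1]
    rw [hidx] at hid ⊢
    refine Or.inr ⟨by exact pvEnc_lt (by omega) ha, hq, by rw [hid]; exact hgq, hid, Or.inr ?_⟩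
    rw [hqe]; omega
  · -- down neighbour (cx, cy + 1)
    have hbh' : cy.toNat + 1 < hh := by omega
    have hts : (cy + 1).toNat = cy.toNat + 1 := by omega
    have hidx : pvToIdx w (cx, cy + 1) = (cy.toNat + 1) * w + cx.toNat := by
      show (cy + 1).toNat * w + cx.toNat = _
      rw [hts]
    have hmul : (cy.toNat + 1) * w = cy.toNat * w + w := Nat.succ_mul _ _
    rw [hidx] at hid ⊢
    refine Or.inl ⟨hq, by exact pvEnc_lt hbh' ha, hgq, hid.symm, Or.inr ?_⟩
    rw [hqe]; omega

theorem pvAdj_nb_inv (g : Nat → String) (w hh : Nat) {cx cy : Int}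
    (hcx0 : 0 ≤ cx) (hcxw : cx < (w : Int)) (hcy0 : 0 ≤ cy) (hcyh : cy < (hh : Int))
    {j : Nat} (hadj : pvAdj g w (hh * w) (pvToIdx w (cx, cy)) j) :
    ∃ nb ∈ [(cx - 1, cy), (cx + 1, cy), (cx, cy - 1), (cx, cy + 1)],
      0 ≤ nb.1 ∧ nb.1 < (w : Int) ∧ 0 ≤ nb.2 ∧ nb.2 < (hh : Int) ∧ pvToIdx w nb = j := by
  have hw : 0 < w := by omega
  have ha : cx.toNat < w := by omega
  have hb : cy.toNat < hh := by omega
  have hqe : pvToIdx w (cx, cy) = cy.toNat * w + cx.toNat := rfl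
  have hqm : (cy.toNat * w + cx.toNat) % w = cx.toNat := (pvEnc_div ha).2
  rcases hadj with ⟨hq, hj, -, -, hdir⟩ | ⟨hj, hq, -, -, hdir⟩
  · rcases hdir with ⟨hj1, hmod⟩ | hjw
    · -- right neighbour
      rw [hqe] at hj1
      rw [hqe, hqm] at hmod
      have haw : cx.toNat + 1 < w := by omega
      have hts : (cx + 1).toNat = cx.toNat + 1 := by omega
      refine ⟨(cx + 1, cy), by simp, by omega, by omega, by omega, by omega, ?_⟩
      show cy.toNat * w + (cx + 1).toNat = j
      rw [hts]; omega
    · -- down neighbour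
      rw [hqe] at hjw
      have hmul : (cy.toNat + 1) * w = cy.toNat * w + w := Nat.succ_mul _ _
      have hbh : cy.toNat + 1 < hh := by
        by_contra hcon
        have h1 : hh * w ≤ (cy.toNat + 1) * w := Nat.mul_le_mul_right w (by omega)
        omega
      have hts : (cy + 1).toNat = cy.toNat + 1 := by omega
      refine ⟨(cx, cy + 1), by simp, by omega, by omega, by omega, by omega, ?_⟩
      show (cy + 1).toNat * w + cx.toNat = j
      rw [hts, hmul]; omega
  · rcases hdir with ⟨hj1, hmod⟩ | hjw
    · -- left neighbour
      rcases pvDec hw hj with ⟨hjh, hjm, hjrec⟩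
      rw [hqe] at hj1
      have henc : cy.toNat * w + cx.toNat = (j / w) * w + (j % w + 1) := by omega
      have hinj := pvEnc_inj ha (by omega) henc
      have ha1 : 1 ≤ cx.toNat := by omega
      have hts : (cx - 1).toNat = cx.toNat - 1 := by omega
      refine ⟨(cx - 1, cy), by simp, by omega, by omega, by omega, by omega, ?_⟩
      show (cy.toNat) * w + (cx - 1).toNat = j
      rw [hts, hinj.1]
      omega
    · -- up neighbour
      rw [hqe] at hjw
      have hb1 : 1 ≤ cy.toNat := by
        by_contra hcon
        have h0 : cy.toNat = 0 := by omega
        rw [h0] at hjw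
        simp at hjw
        omega
      have hmul : (cy.toNat - 1) * w + w = cy.toNat * w := by
        have h1 : cy.toNat - 1 + 1 = cy.toNat := by omega
        calc (cy.toNat - 1) * w + w = (cy.toNat - 1 + 1) * w := (Nat.succ_mul _ _).symm
          _ = cy.toNat * w := by rw [h1]
      have hts : (cy - 1).toNat = cy.toNat - 1 := by omega
      refine ⟨(cx, cy - 1), by simp, by omega, by omega, by omega, by omega, ?_⟩
      show (cy - 1).toNat * w + cx.toNat = j
      rw [hts]
      omega

/- ---------- the flood fill ---------- -/

def pvStep (layout : List (List String)) (w hh : Int) (pid : String) :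
    (List (Int × Int) × List (List Bool)) → (Int × Int) → (List (Int × Int) × List (List Bool)) :=
  fun s nb =>
    if 0 ≤ nb.1 ∧ nb.1 < w ∧ 0 ≤ nb.2 ∧ nb.2 < hh ∧
        ¬ pvSeenAt s.2 nb.2 nb.1 = true ∧ pvCellI layout nb.2 nb.1 = pid
    then (nb :: s.1, pvSetSeen s.2 nb.2 nb.1) else s

theorem pvFloodA_cons (layout : List (List String)) (w hh : Int) (pid : String) (fuel : Nat)
    (cx cy : Int) (rest : List (Int × Int)) (sn : List (List Bool)) (size : Int) :
    pvFloodA layout w hh pid (fuel + 1) ((cx, cy) :: rest) sn size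
      = pvFloodA layout w hh pid fuel
          ([(cx - 1, cy), (cx + 1, cy), (cx, cy - 1), (cx, cy + 1)].foldl
            (pvStep layout w hh pid) (rest, sn)).1
          ([(cx - 1, cy), (cx + 1, cy), (cx, cy - 1), (cx, cy + 1)].foldl
            (pvStep layout w hh pid) (rest, sn)).2
          (size + 1) := rfl

theorem pvNbFold (layout : List (List String)) (w : Nat) (pid : String)
    (S comp : Finset Nat)
    (hcompA : ∀ i ∈ comp, ∀ j, pvAdj (pvG layout w) w (layout.length * w) i j → j ∈ comp)
    (q : Nat) (hq : q ∈ comp)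
    (nbs : List (Int × Int))
    (hnbs : ∀ nb ∈ nbs, (0 ≤ nb.1 ∧ nb.1 < (w : Int) ∧ 0 ≤ nb.2 ∧ nb.2 < ((layout.length : Int))) →
        pvG layout w (pvToIdx w nb) = pid →
        pvAdj (pvG layout w) w (layout.length * w) q (pvToIdx w nb)) :
    ∀ (V : Finset Nat) (st : List (Int × Int)) (sn : List (List Bool)),
      V ⊆ comp →
      pvSeenInv layout.length w sn (S ∪ V) →
      (∀ p ∈ st, 0 ≤ p.1 ∧ p.1 < (w : Int) ∧ 0 ≤ p.2 ∧ p.2 < ((layout.length : Int)) ∧ pvToIdx w p ∈ V) →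
      (st.map (pvToIdx w)).Nodup →
      q ∈ V → q ∉ st.map (pvToIdx w) →
      ∃ V' : Finset Nat,
        V ⊆ V' ∧ V' ⊆ comp ∧
        pvSeenInv layout.length w
          (nbs.foldl (pvStep layout (w : Int) ((layout.length : Int)) pid) (st, sn)).2 (S ∪ V') ∧
        (∀ p ∈ (nbs.foldl (pvStep layout (w : Int) ((layout.length : Int)) pid) (st, sn)).1,
          0 ≤ p.1 ∧ p.1 < (w : Int) ∧ 0 ≤ p.2 ∧ p.2 < ((layout.length : Int)) ∧ pvToIdx w p ∈ V') ∧
        ((nbs.foldl (pvStep layout (w : Int) ((layout.length : Int)) pid) (st, sn)).1.map (pvToIdx w)).Nodup ∧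
        q ∉ (nbs.foldl (pvStep layout (w : Int) ((layout.length : Int)) pid) (st, sn)).1.map (pvToIdx w) ∧
        (∀ p ∈ st, p ∈ (nbs.foldl (pvStep layout (w : Int) ((layout.length : Int)) pid) (st, sn)).1) ∧
        V'.card + st.length
          = V.card + (nbs.foldl (pvStep layout (w : Int) ((layout.length : Int)) pid) (st, sn)).1.length ∧
        (∀ v ∈ V', v ∉ V → v ∈ (nbs.foldl (pvStep layout (w : Int) ((layout.length : Int)) pid) (st, sn)).1.map (pvToIdx w)) ∧
        (∀ nb ∈ nbs, (0 ≤ nb.1 ∧ nb.1 < (w : Int) ∧ 0 ≤ nb.2 ∧ nb.2 < ((layout.length : Int))) →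
          pvG layout w (pvToIdx w nb) = pid → pvToIdx w nb ∈ S ∪ V') := by
  induction nbs with
  | nil =>
    intro V st sn hV hsn hst hnd hqV hqst
    exact ⟨V, Finset.Subset.refl V, hV, hsn, hst, hnd, hqst, fun p hp => hp, rfl, fun v hv hv' => absurd hv hv',
      fun nb hnb => absurd hnb (List.not_mem_nil)⟩
  | cons nb rest ih =>
    intro V st sn hV hsn hst hnd hqV hqst
    rw [List.foldl_cons]
    by_cases hacc : 0 ≤ nb.1 ∧ nb.1 < (w : Int) ∧ 0 ≤ nb.2 ∧ nb.2 < ((layout.length : Int)) ∧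
        ¬ pvSeenAt sn nb.2 nb.1 = true ∧ pvCellI layout nb.2 nb.1 = pid
    · obtain ⟨h1, h2, h3, h4, h5, h6⟩ := hacc
      have hstep : pvStep layout (w : Int) ((layout.length : Int)) pid (st, sn) nb
          = (nb :: st, pvSetSeen sn nb.2 nb.1) := by
        rw [pvStep, if_pos ⟨h1, h2, h3, h4, h5, h6⟩]
      have hxw : nb.1.toNat < w := by omega
      have hyh : nb.2.toNat < layout.length := by omega
      have hcast1 : nb.1 = ((nb.1.toNat : Nat) : Int) := by omega
      have hcast2 : nb.2 = ((nb.2.toNat : Nat) : Int) := by omega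
      have hgnb : pvG layout w (pvToIdx w nb) = pid := by
        rw [← pvCellI_eq layout w nb h1 h2]; exact h6
      have hunseen : pvToIdx w nb ∉ S ∪ V := by
        intro hmem
        apply h5
        rw [hcast1, hcast2]
        exact (pvSeenAt_iff hsn hyh hxw).mpr hmem
      have hadj : pvAdj (pvG layout w) w (layout.length * w) q (pvToIdx w nb) :=
        hnbs nb (List.mem_cons_self) ⟨h1, h2, h3, h4⟩ hgnb
      have hnbcomp : pvToIdx w nb ∈ comp := hcompA q hq _ hadj
      have hnbV : pvToIdx w nb ∉ V := fun h => hunseen (Finset.mem_union_right _ h)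
      have hsn' : pvSeenInv layout.length w (pvSetSeen sn nb.2 nb.1) (S ∪ insert (pvToIdx w nb) V) := by
        have := pvSetSeen_inv hsn hyh hxw
        rw [Finset.union_insert]
        rw [hcast1, hcast2]
        exact this
      have hstV' : ∀ p ∈ nb :: st, 0 ≤ p.1 ∧ p.1 < (w : Int) ∧ 0 ≤ p.2 ∧
          p.2 < ((layout.length : Int)) ∧ pvToIdx w p ∈ insert (pvToIdx w nb) V := by
        intro p hp
        rcases List.mem_cons.mp hp with rfl | hp
        · exact ⟨h1, h2, h3, h4, Finset.mem_insert_self _ _⟩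
        · obtain ⟨a1, a2, a3, a4, a5⟩ := hst p hp
          exact ⟨a1, a2, a3, a4, Finset.mem_insert_of_mem a5⟩
      have hnbst : pvToIdx w nb ∉ st.map (pvToIdx w) := by
        intro hmem
        obtain ⟨p, hp, hpe⟩ := List.mem_map.mp hmem
        exact hnbV (hpe ▸ (hst p hp).2.2.2.2)
      have hnd' : ((nb :: st).map (pvToIdx w)).Nodup := by
        rw [List.map_cons, List.nodup_cons]
        exact ⟨hnbst, hnd⟩
      have hqV' : q ∈ insert (pvToIdx w nb) V := Finset.mem_insert_of_mem hqV
      have hqst' : q ∉ (nb :: st).map (pvToIdx w) := by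
        rw [List.map_cons, List.mem_cons]
        rintro (rfl | hmem)
        · exact hnbV hqV
        · exact hqst hmem
      have hV' : insert (pvToIdx w nb) V ⊆ comp := Finset.insert_subset hnbcomp hV
      obtain ⟨V', hVV', hV'c, r2, r3, r4, r5, r6, r7, r8, r9⟩ :=
        ih (fun nb' h hb hg => hnbs nb' (List.mem_cons_of_mem _ h) hb hg)
          (insert (pvToIdx w nb) V) (nb :: st) (pvSetSeen sn nb.2 nb.1) hV' hsn' hstV' hnd' hqV' hqst'
      rw [hstep]
      refine ⟨V', (Finset.subset_insert _ _).trans hVV', hV'c, r2, r3, r4, r5, ?_, ?_, ?_, ?_⟩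
      · intro p hp; exact r6 p (List.mem_cons_of_mem _ hp)
      · rw [Finset.card_insert_of_notMem hnbV] at r7
        simp only [List.length_cons] at r7
        omega
      · intro v hv hvV
        by_cases hveq : v = pvToIdx w nb
        · subst hveq
          have : nb ∈ (rest.foldl (pvStep layout (w : Int) ((layout.length : Int)) pid) (nb :: st, pvSetSeen sn nb.2 nb.1)).1 :=
            r6 nb (List.mem_cons_self)
          exact List.mem_map.mpr ⟨nb, this, rfl⟩
        · exact r8 v hv (fun h => hvV (Finset.mem_of_mem_insert_of_ne h hveq))
      · intro nb' hnb' hbnds hgnb'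
        rcases List.mem_cons.mp hnb' with rfl | hnb'
        · exact Finset.mem_union_right _ (hVV' (Finset.mem_insert_self _ _))
        · exact r9 nb' hnb' hbnds hgnb'
    · have hstep : pvStep layout (w : Int) ((layout.length : Int)) pid (st, sn) nb = (st, sn) := by
        rw [pvStep, if_neg hacc]
      rw [hstep]
      obtain ⟨V', hVV', hV'c, r2, r3, r4, r5, r6, r7, r8, r9⟩ :=
        ih (fun nb' h hb hg => hnbs nb' (List.mem_cons_of_mem _ h) hb hg)
          V st sn hV hsn hst hnd hqV hqst
      refine ⟨V', hVV', hV'c, r2, r3, r4, r5, r6, r7, r8, ?_⟩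
      intro nb' hnb' hbnds hgnb'
      rcases List.mem_cons.mp hnb' with rfl | hnb'
      · -- the neighbour was rejected: it must already be seen
        obtain ⟨h1, h2, h3, h4⟩ := hbnds
        have hxw : nb'.1.toNat < w := by omega
        have hyh : nb'.2.toNat < layout.length := by omega
        have hcast1 : nb'.1 = ((nb'.1.toNat : Nat) : Int) := by omega
        have hcast2 : nb'.2 = ((nb'.2.toNat : Nat) : Int) := by omega
        have hcell : pvCellI layout nb'.2 nb'.1 = pid := by
          rw [pvCellI_eq layout w nb' h1 h2]; exact hgnb'
        have hseen : pvSeenAt sn nb'.2 nb'.1 = true := by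
          by_contra hns
          exact hacc ⟨h1, h2, h3, h4, hns, hcell⟩
        have hmem : pvToIdx w nb' ∈ S ∪ V := by
          rw [hcast1, hcast2] at hseen
          exact (pvSeenAt_iff hsn hyh hxw).mp hseen
        rcases Finset.mem_union.mp hmem with h | h
        · exact Finset.mem_union_left _ h
        · exact Finset.mem_union_right _ (hVV' h)
      · exact r9 nb' hnb' hbnds hgnb'
theorem pvFlood_spec (layout : List (List String)) (w : Nat) (hw : 0 < w) (pid : String)
    (c : Nat) (hc : c < layout.length * w) (hpid : pvG layout w c = pid) (hne : pid ≠ "")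
    (S : Finset Nat)
    (hS : ∀ i ∈ S, ∀ j, pvAdj (pvG layout w) w (layout.length * w) i j → j ∈ S)
    (hSc : c ∉ S) :
    ∀ (fuel : Nat) (V : Finset Nat) (st : List (Int × Int)) (sn : List (List Bool)) (size : Int),
      V ⊆ pvComp (pvG layout w) w (layout.length * w) c →
      c ∈ V →
      pvSeenInv layout.length w sn (S ∪ V) →
      (∀ p ∈ st, 0 ≤ p.1 ∧ p.1 < (w : Int) ∧ 0 ≤ p.2 ∧ p.2 < ((layout.length : Int)) ∧ pvToIdx w p ∈ V) →
      (st.map (pvToIdx w)).Nodup →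
      (∀ v ∈ V, v ∉ st.map (pvToIdx w) → ∀ j,
        pvAdj (pvG layout w) w (layout.length * w) v j → j ∈ S ∪ V) →
      st.length + ((pvComp (pvG layout w) w (layout.length * w) c).card - V.card) ≤ fuel →
      ∃ sn', pvFloodA layout (w : Int) ((layout.length : Int)) pid fuel st sn size
          = (sn', size + st.length
              + (((pvComp (pvG layout w) w (layout.length * w) c).card - V.card : Nat) : Int))
        ∧ pvSeenInv layout.length w sn' (S ∪ pvComp (pvG layout w) w (layout.length * w) c) := by
  have hcompA : ∀ i ∈ pvComp (pvG layout w) w (layout.length * w) c, ∀ j,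
      pvAdj (pvG layout w) w (layout.length * w) i j →
      j ∈ pvComp (pvG layout w) w (layout.length * w) c := by
    intro i hi j hadj
    obtain ⟨hin, hr⟩ := pvMem_comp.mp hi
    exact pvMem_comp.mpr ⟨(pvAdj_lt hadj).2, hr.tail hadj⟩
  have hdisj : ∀ i ∈ pvComp (pvG layout w) w (layout.length * w) c, i ∉ S := by
    intro i hi hiS
    exact hSc (pvClosed_back hS (pvMem_comp.mp hi).2 hiS)
  have hgcomp : ∀ i ∈ pvComp (pvG layout w) w (layout.length * w) c, pvG layout w i = pid := by
    intro i hi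
    rw [← (pvReach_id (pvMem_comp.mp hi).2)]
    exact hpid
  intro fuel
  induction fuel with
  | zero =>
    intro V st sn size hV hcV hsn hst hnd hfr hfuel
    have hVcard : V.card ≤ (pvComp (pvG layout w) w (layout.length * w) c).card :=
      Finset.card_le_card hV
    have hVeq : V = pvComp (pvG layout w) w (layout.length * w) c :=
      Finset.eq_of_subset_of_card_le hV (by omega)
    refine ⟨sn, ?_, by rw [← hVeq]; exact hsn⟩
    show (sn, size) = _
    have h1 : st.length = 0 := by omega
    have h2 : (pvComp (pvG layout w) w (layout.length * w) c).card - V.card = 0 := by omega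
    rw [h1, h2]
    norm_num
  | succ m ih =>
    intro V st sn size hV hcV hsn hst hnd hfr hfuel
    match st with
    | [] =>
      have hcomp_sub : pvComp (pvG layout w) w (layout.length * w) c ⊆ V := by
        intro j hj
        obtain ⟨hjn, hreach⟩ := pvMem_comp.mp hj
        clear hjn
        induction hreach with
        | refl => exact hcV
        | tail hcb hadj ihr =>
          rename_i b j'
          have hbV : b ∈ V := ihr (pvMem_comp.mpr ⟨(pvReach_lt hc hcb), hcb⟩)
          have := hfr b hbV (by simp) j' hadj
          rcases Finset.mem_union.mp this with hjS | hjV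
          · exact absurd (pvClosed_back hS (hcb.tail hadj) hjS) hSc
          · exact hjV
      have hVeq : V = pvComp (pvG layout w) w (layout.length * w) c :=
        Finset.Subset.antisymm hV hcomp_sub
      refine ⟨sn, ?_, by rw [← hVeq]; exact hsn⟩
      show (sn, size) = _
      have h2 : (pvComp (pvG layout w) w (layout.length * w) c).card - V.card = 0 := by
        rw [hVeq]; omega
      rw [h2]
      norm_num
    | (cx, cy) :: rest =>
      obtain ⟨hx0, hxw, hy0, hyh, hqV⟩ := hst (cx, cy) (List.mem_cons_self)
      have hq : pvToIdx w (cx, cy) ∈ pvComp (pvG layout w) w (layout.length * w) c := hV hqV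
      have hgq : pvG layout w (pvToIdx w (cx, cy)) = pid := hgcomp _ hq
      have hnbs : ∀ nb ∈ [(cx - 1, cy), (cx + 1, cy), (cx, cy - 1), (cx, cy + 1)],
          (0 ≤ nb.1 ∧ nb.1 < (w : Int) ∧ 0 ≤ nb.2 ∧ nb.2 < ((layout.length : Int))) →
          pvG layout w (pvToIdx w nb) = pid →
          pvAdj (pvG layout w) w (layout.length * w) (pvToIdx w (cx, cy)) (pvToIdx w nb) := by
        intro nb hnb ⟨hb1, hb2, hb3, hb4⟩ hgnb
        exact pvNb_adj (pvG layout w) w layout.length hx0 hxw hy0 hyh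
          (by rw [hgq]; exact hne) nb hnb hb1 hb2 hb3 hb4 (by rw [hgnb, hgq])
      have hqrest : pvToIdx w (cx, cy) ∉ rest.map (pvToIdx w) := by
        have := hnd
        rw [List.map_cons, List.nodup_cons] at this
        exact this.1
      obtain ⟨V', hVV', hV'c, r2, r3, r4, r5, r6, r7, r8, r9⟩ :=
        pvNbFold layout w pid S (pvComp (pvG layout w) w (layout.length * w) c) hcompA
          (pvToIdx w (cx, cy)) hq
          [(cx - 1, cy), (cx + 1, cy), (cx, cy - 1), (cx, cy + 1)] hnbs
          V rest sn hV hsn (fun p hp => hst p (List.mem_cons_of_mem _ hp))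
          (by rw [List.map_cons, List.nodup_cons] at hnd; exact hnd.2) hqV hqrest
      have hcard1 : V.card ≤ V'.card := Finset.card_le_card hVV'
      have hcard2 : V'.card ≤ (pvComp (pvG layout w) w (layout.length * w) c).card :=
        Finset.card_le_card hV'c
      have hfr' : ∀ v ∈ V', v ∉ (([(cx - 1, cy), (cx + 1, cy), (cx, cy - 1), (cx, cy + 1)].foldl
            (pvStep layout (w : Int) ((layout.length : Int)) pid) (rest, sn)).1.map (pvToIdx w)) →
          ∀ j, pvAdj (pvG layout w) w (layout.length * w) v j → j ∈ S ∪ V' := by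
        intro v hv hvmap j hadj
        by_cases hvV : v ∈ V
        · by_cases hvq : v = pvToIdx w (cx, cy)
          · subst hvq
            obtain ⟨nb, hnbmem, hn1, hn2, hn3, hn4, hnidx⟩ :=
              pvAdj_nb_inv (pvG layout w) w layout.length hx0 hxw hy0 hyh hadj
            have hgj : pvG layout w j = pid := by
              rw [← pvAdj_id hadj]
              exact hgq
            exact hnidx ▸ (r9 nb hnbmem ⟨hn1, hn2, hn3, hn4⟩ (by rw [hnidx]; exact hgj))
          · have hvrest : v ∉ rest.map (pvToIdx w) := by
              intro hmem
              obtain ⟨p, hp, hpe⟩ := List.mem_map.mp hmem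
              exact hvmap (List.mem_map.mpr ⟨p, r6 p hp, hpe⟩)
            have hvst : v ∉ ((cx, cy) :: rest).map (pvToIdx w) := by
              rw [List.map_cons, List.mem_cons]
              rintro (h | h)
              · exact hvq h
              · exact hvrest h
            rcases Finset.mem_union.mp (hfr v hvV hvst j hadj) with h | h
            · exact Finset.mem_union_left _ h
            · exact Finset.mem_union_right _ (hVV' h)
        · exact absurd (r8 v hv hvV) hvmap
      obtain ⟨sn', heq, hsnf⟩ := ih V'
        ([(cx - 1, cy), (cx + 1, cy), (cx, cy - 1), (cx, cy + 1)].foldl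
          (pvStep layout (w : Int) ((layout.length : Int)) pid) (rest, sn)).1
        ([(cx - 1, cy), (cx + 1, cy), (cx, cy - 1), (cx, cy + 1)].foldl
          (pvStep layout (w : Int) ((layout.length : Int)) pid) (rest, sn)).2
        (size + 1) hV'c (hVV' hcV) r2 r3 r4 hfr' (by simp only [List.length_cons] at hfuel; omega)
      refine ⟨sn', ?_, hsnf⟩
      rw [pvFloodA_cons, heq]
      have hlen : V'.card + rest.length = V.card +
          (([(cx - 1, cy), (cx + 1, cy), (cx, cy - 1), (cx, cy + 1)].foldl
            (pvStep layout (w : Int) ((layout.length : Int)) pid) (rest, sn)).1).length := r7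
      congr 1
      simp only [List.length_cons]
      push_cast
      omega

/- ---------- dict utilities ---------- -/

theorem pvDict_insert_getD_self {κ ν : Type} [BEq κ] [LawfulBEq κ]
    (d : PySem.Dict κ ν) (k : κ) (v0 : ν) (hnd : d.keys.Nodup)
    (hc : d.contains k = true) (hv : d.get? k = some v0) : d.insert k v0 = d := by
  apply PySem.Dict.ext
  rw [PySem.Dict.items_insert_of_contains d v0 hc]
  conv_rhs => rw [← List.map_id d.items]
  apply List.map_congr_left
  rintro ⟨a, b⟩ hp
  by_cases he : a = k
  · subst he
    have hab : d.get? a = some b := PySem.Dict.get?_of_mem_items d hp hnd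
    rw [hv] at hab
    have hb : v0 = b := by injection hab
    cases hb
    simp
  · simp [he]

/- ---------- the common "best per id" dict ---------- -/

noncomputable def pvBest (g : Nat → String) (w n : Nat) (cells : List Nat) : PySem.Dict String Int :=
  cells.foldl (fun b i => if g i = "" then b else
    b.insert (g i) (max (b.getD (g i) 0) ((pvComp g w n i).card : Int))) PySem.Dict.empty

def pvIsRep (g : Nat → String) (w n : Nat) (i : Nat) : Prop :=
  ∀ j, pvReach g w n i j → i ≤ j

noncomputable def pvBestR (g : Nat → String) (w n : Nat) (cells : List Nat) : PySem.Dict String Int :=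
  cells.foldl (fun b i =>
    @ite _ (g i = "" ∨ ¬ pvIsRep g w n i) (Classical.propDecidable _) b
      (b.insert (g i) (max (b.getD (g i) 0) ((pvComp g w n i).card : Int)))) PySem.Dict.empty

theorem pvBest_aux (g : Nat → String) (w n : Nat) : ∀ k,
    pvBestR g w n (List.range k) = pvBest g w n (List.range k) ∧
    (pvBest g w n (List.range k)).keys.Nodup ∧
    ∀ j, j < k → g j ≠ "" → (pvBest g w n (List.range k)).contains (g j) = true ∧
      ((pvComp g w n j).card : Int) ≤ (pvBest g w n (List.range k)).getD (g j) 0 := by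
  intro k
  induction k with
  | zero => refine ⟨rfl, by simp [pvBest, PySem.Dict.keys_empty], by omega⟩
  | succ m ih =>
    obtain ⟨heq, hnd, hinv⟩ := ih
    have hstepB : pvBest g w n (List.range (m + 1))
        = (if g m = "" then pvBest g w n (List.range m) else
            (pvBest g w n (List.range m)).insert (g m)
              (max ((pvBest g w n (List.range m)).getD (g m) 0) ((pvComp g w n m).card : Int))) := by
      rw [pvBest, List.range_succ, List.foldl_append, List.foldl_cons, List.foldl_nil]; rfl
    have hstepR : pvBestR g w n (List.range (m + 1))
        = (@ite _ (g m = "" ∨ ¬ pvIsRep g w n m) (Classical.propDecidable _)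
            (pvBestR g w n (List.range m))
            ((pvBestR g w n (List.range m)).insert (g m)
              (max ((pvBestR g w n (List.range m)).getD (g m) 0) ((pvComp g w n m).card : Int)))) := by
      rw [pvBestR, List.range_succ, List.foldl_append, List.foldl_cons, List.foldl_nil]; rfl
    by_cases hm : g m = ""
    · rw [hstepB, hstepR, if_pos hm, if_pos (Or.inl hm), heq]
      refine ⟨rfl, hnd, ?_⟩
      intro j hj hgj
      rcases Nat.lt_succ_iff_lt_or_eq.mp hj with hj | rfl
      · exact hinv j hj hgj
      · exact absurd hm hgj
    · by_cases hrep : pvIsRep g w n m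
      · rw [hstepB, hstepR, if_neg hm, if_neg (by tauto), heq]
        refine ⟨rfl, PySem.Dict.nodup_keys_insert _ _ _ hnd, ?_⟩
        intro j hj hgj
        by_cases hkey : g j = g m
        · rw [hkey]
          constructor
          · simp [PySem.Dict.contains_insert]
          · rw [PySem.Dict.getD_insert_self]
            rcases Nat.lt_succ_iff_lt_or_eq.mp hj with hj | rfl
            · calc ((pvComp g w n j).card : Int)
                  ≤ (pvBest g w n (List.range m)).getD (g j) 0 := (hinv j hj hgj).2
                _ = (pvBest g w n (List.range m)).getD (g m) 0 := by rw [hkey]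
                _ ≤ _ := le_max_left _ _
            · exact le_max_right _ _
        · rcases Nat.lt_succ_iff_lt_or_eq.mp hj with hj | rfl
          · obtain ⟨hc, hd⟩ := hinv j hj hgj
            refine ⟨?_, ?_⟩
            · rw [PySem.Dict.contains_insert]; simp [hc]
            · rw [PySem.Dict.getD_insert_of_ne _ _ _ hkey]; exact hd
          · exact absurd rfl hkey
      · -- m is not a representative: some j < m reaches it; the insert is a no-op
        have hex : ∃ j, pvReach g w n m j ∧ j < m := by
          by_contra hno
          push_neg at hno
          exact hrep (fun j hr => by
            rcases Nat.lt_or_ge j m with hlt | hge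
            · exact absurd hlt (by simpa using hno j hr)
            · exact hge)
        obtain ⟨j, hr, hj⟩ := hex
        have hgj : g j ≠ "" := by rw [← pvReach_id hr]; exact hm
        obtain ⟨hc, hd⟩ := hinv j hj hgj
        have hkey : g j = g m := (pvReach_id hr).symm
        have hcomp : pvComp g w n j = pvComp g w n m := pvComp_eq_of_reach (pvReach_symm hr)
        rw [hstepB, hstepR, if_neg hm, if_pos (Or.inr hrep), heq]
        have hmax : max ((pvBest g w n (List.range m)).getD (g m) 0) ((pvComp g w n m).card : Int)
            = (pvBest g w n (List.range m)).getD (g m) 0 := by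
          rw [← hkey, ← hcomp]
          exact max_eq_left hd
        rw [hmax]
        have hcm : (pvBest g w n (List.range m)).contains (g m) = true := by rw [← hkey]; exact hc
        obtain ⟨v0, hv0⟩ : ∃ v0, (pvBest g w n (List.range m)).get? (g m) = some v0 := by
          rcases ho : (pvBest g w n (List.range m)).get? (g m) with _ | v0
          · exact absurd hcm (by
              simp [(PySem.Dict.get?_eq_none_iff_contains (pvBest g w n (List.range m)) (g m)).mp ho])
          · exact ⟨v0, rfl⟩
        have hgd : (pvBest g w n (List.range m)).getD (g m) 0 = v0 := by
          rw [PySem.Dict.getD_eq_get?_getD, hv0]; rfl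
        rw [hgd, pvDict_insert_getD_self _ _ _ hnd hcm hv0]
        refine ⟨rfl, hnd, ?_⟩
        intro j' hj' hgj'
        rcases Nat.lt_succ_iff_lt_or_eq.mp hj' with hj' | rfl
        · exact hinv j' hj' hgj'
        · refine ⟨by rw [← hkey]; exact hc, ?_⟩
          rw [← hkey, ← hcomp]
          exact hd

theorem pvBestR_eq_pvBest (g : Nat → String) (w n : Nat) :
    pvBestR g w n (List.range n) = pvBest g w n (List.range n) := (pvBest_aux g w n n).1


/- ---------- the A side: outer scan ---------- -/

noncomputable def pvSk (g : Nat → String) (w n : Nat) (k : Nat) : Finset Nat :=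
  @Finset.filter _ (fun i => ∃ j, j < k ∧ g j ≠ "" ∧ pvReach g w n j i)
    (Classical.decPred _) (Finset.range n)

theorem pvSk_mem {g w n k i} :
    i ∈ pvSk g w n k ↔ i < n ∧ ∃ j, j < k ∧ g j ≠ "" ∧ pvReach g w n j i := by
  simp [pvSk, Finset.mem_filter, Finset.mem_range, and_comm]

theorem pvSk_closed {g : Nat → String} {w n k : Nat} :
    ∀ i ∈ pvSk g w n k, ∀ j, pvAdj g w n i j → j ∈ pvSk g w n k := by
  intro i hi t hadj
  obtain ⟨hin, j, hj, hgj, hr⟩ := pvSk_mem.mp hi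
  exact pvSk_mem.mpr ⟨(pvAdj_lt hadj).2, j, hj, hgj, hr.tail hadj⟩

theorem pvSk_ne {g : Nat → String} {w n k i : Nat} (hi : i ∈ pvSk g w n k) : g i ≠ "" := by
  obtain ⟨-, j, -, hgj, hr⟩ := pvSk_mem.mp hi
  rw [← pvReach_id hr]; exact hgj

theorem pvSk_succ_empty {g : Nat → String} {w n k : Nat} (hgk : g k = "") :
    pvSk g w n (k + 1) = pvSk g w n k := by
  ext i
  simp only [pvSk_mem]
  constructor
  · rintro ⟨hin, j, hj, hgj, hr⟩
    rcases Nat.lt_succ_iff_lt_or_eq.mp hj with hj | rfl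
    · exact ⟨hin, j, hj, hgj, hr⟩
    · exact absurd hgk hgj
  · rintro ⟨hin, j, hj, hgj, hr⟩
    exact ⟨hin, j, by omega, hgj, hr⟩

theorem pvSk_succ_seen {g : Nat → String} {w n k : Nat} (hk : k ∈ pvSk g w n k) :
    pvSk g w n (k + 1) = pvSk g w n k := by
  obtain ⟨-, j0, hj0, hgj0, hr0⟩ := pvSk_mem.mp hk
  ext i
  simp only [pvSk_mem]
  constructor
  · rintro ⟨hin, j, hj, hgj, hr⟩
    rcases Nat.lt_succ_iff_lt_or_eq.mp hj with hj | rfl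
    · exact ⟨hin, j, hj, hgj, hr⟩
    · exact ⟨hin, j0, hj0, hgj0, hr0.trans hr⟩
  · rintro ⟨hin, j, hj, hgj, hr⟩
    exact ⟨hin, j, by omega, hgj, hr⟩

theorem pvSk_succ_flood {g : Nat → String} {w n k : Nat} (hgk : g k ≠ "") :
    pvSk g w n (k + 1) = pvSk g w n k ∪ pvComp g w n k := by
  ext i
  simp only [pvSk_mem, Finset.mem_union, pvMem_comp]
  constructor
  · rintro ⟨hin, j, hj, hgj, hr⟩
    rcases Nat.lt_succ_iff_lt_or_eq.mp hj with hj | rfl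
    · exact Or.inl ⟨hin, j, hj, hgj, hr⟩
    · exact Or.inr ⟨hin, hr⟩
  · rintro (⟨hin, j, hj, hgj, hr⟩ | ⟨hin, hr⟩)
    · exact ⟨hin, j, by omega, hgj, hr⟩
    · exact ⟨hin, k, by omega, hgk, hr⟩

theorem pvSk_self_iff {g : Nat → String} {w n k : Nat} (hkn : k < n) (hgk : g k ≠ "") :
    k ∈ pvSk g w n k ↔ ¬ pvIsRep g w n k := by
  constructor
  · rintro hk hrep
    obtain ⟨-, j, hj, hgj, hr⟩ := pvSk_mem.mp hk
    exact absurd (hrep j (pvReach_symm hr)) (by omega)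
  · intro hrep
    have hex : ∃ j, pvReach g w n k j ∧ j < k := by
      by_contra hno
      push_neg at hno
      exact hrep (fun j hr => by
        rcases Nat.lt_or_ge j k with hlt | hge
        · exact absurd hlt (by simpa using hno j hr)
        · exact hge)
    obtain ⟨j, hr, hj⟩ := hex
    exact pvSk_mem.mpr ⟨hkn, j, hj, by rw [← pvReach_id hr]; exact hgk, pvReach_symm hr⟩

def pvABody (layout : List (List String)) (w : Nat) :
    (List (List Bool) × PySem.Dict String Int) → Nat → Nat →
      (List (List Bool) × PySem.Dict String Int) :=
  fun st y x =>
    if pvSeenAt st.1 (y : Int) (x : Int) then st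
    else
      let pid := (layout.getD y []).getD x ""
      if pid = "" then st
      else
        let r := pvFloodA layout (w : Int) ((layout.length : Int)) pid (layout.length * w + 1)
          [((x : Int), (y : Int))] (pvSetSeen st.1 (y : Int) (x : Int)) 0
        (r.1, st.2.insert pid (max (st.2.getD pid 0) r.2))

theorem pvAFold (layout : List (List String)) (w : Nat) (hw : 0 < w) :
    ∀ k, k ≤ layout.length * w →
    ∃ sn, (List.range k).foldl (fun st i => pvABody layout w st (i / w) (i % w))
        (List.replicate layout.length (List.replicate w false), PySem.Dict.empty)
      = (sn, pvBestR (pvG layout w) w (layout.length * w) (List.range k))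
      ∧ pvSeenInv layout.length w sn (pvSk (pvG layout w) w (layout.length * w) k) := by
  intro k
  induction k with
  | zero =>
    intro _
    refine ⟨List.replicate layout.length (List.replicate w false), rfl, ?_⟩
    have h0 : pvSk (pvG layout w) w (layout.length * w) 0 = ∅ := by
      ext i; simp [pvSk_mem]
    rw [h0]
    exact pvSeenInv_init _ _
  | succ k ih =>
    intro hk1
    have hkn : k < layout.length * w := by omega
    obtain ⟨sn, heq, hsn⟩ := ih (by omega)
    rcases pvDec hw hkn with ⟨hyh, hxw, henc⟩
    have hstep : (List.range (k + 1)).foldl (fun st i => pvABody layout w st (i / w) (i % w))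
        (List.replicate layout.length (List.replicate w false), PySem.Dict.empty)
        = pvABody layout w (sn, pvBestR (pvG layout w) w (layout.length * w) (List.range k))
            (k / w) (k % w) := by
      rw [List.range_succ, List.foldl_append, List.foldl_cons, List.foldl_nil, heq]
    have hstepR : pvBestR (pvG layout w) w (layout.length * w) (List.range (k + 1))
        = (@ite _ (pvG layout w k = "" ∨ ¬ pvIsRep (pvG layout w) w (layout.length * w) k)
            (Classical.propDecidable _)
            (pvBestR (pvG layout w) w (layout.length * w) (List.range k))
            ((pvBestR (pvG layout w) w (layout.length * w) (List.range k)).insert (pvG layout w k)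
              (max ((pvBestR (pvG layout w) w (layout.length * w) (List.range k)).getD (pvG layout w k) 0)
                ((pvComp (pvG layout w) w (layout.length * w) k).card : Int)))) := by
      rw [pvBestR, List.range_succ, List.foldl_append, List.foldl_cons, List.foldl_nil]; rfl
    have hpid : (layout.getD (k / w) []).getD (k % w) "" = pvG layout w k := rfl
    by_cases hseen : k ∈ pvSk (pvG layout w) w (layout.length * w) k
    · -- already seen: skip
      have hT : pvSeenAt sn ((k / w : Nat) : Int) ((k % w : Nat) : Int) = true := by
        rw [pvSeenAt_iff hsn hyh hxw, henc]; exact hseen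
      have hgk : pvG layout w k ≠ "" := pvSk_ne hseen
      have hnrep : ¬ pvIsRep (pvG layout w) w (layout.length * w) k :=
        (pvSk_self_iff hkn hgk).mp hseen
      refine ⟨sn, ?_, ?_⟩
      · rw [hstep, pvABody, if_pos hT, hstepR, if_pos (Or.inr hnrep)]
      · rw [pvSk_succ_seen hseen]; exact hsn
    · have hF : ¬ pvSeenAt sn ((k / w : Nat) : Int) ((k % w : Nat) : Int) = true := by
        rw [pvSeenAt_iff hsn hyh hxw, henc]; exact hseen
      by_cases hgk : pvG layout w k = ""
      · refine ⟨sn, ?_, ?_⟩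
        · rw [hstep, pvABody, if_neg hF]
          simp only [hpid]
          rw [if_pos hgk, hstepR, if_pos (Or.inl hgk)]
        · rw [pvSk_succ_empty hgk]; exact hsn
      · -- flood fill from the fresh cell k
        have hrep : pvIsRep (pvG layout w) w (layout.length * w) k := by
          by_contra hnr
          exact hseen ((pvSk_self_iff hkn hgk).mpr hnr)
        have hsn1 : pvSeenInv layout.length w
            (pvSetSeen sn ((k / w : Nat) : Int) ((k % w : Nat) : Int))
            (pvSk (pvG layout w) w (layout.length * w) k ∪ {k}) := by
          have := pvSetSeen_inv hsn hyh hxw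
          rw [henc] at this
          rw [Finset.union_singleton]
          exact this
        have hcm : k ∈ pvComp (pvG layout w) w (layout.length * w) k := pvSelf_mem_comp hkn
        have hcard1 : 1 ≤ (pvComp (pvG layout w) w (layout.length * w) k).card :=
          Finset.card_pos.mpr ⟨k, hcm⟩
        have hcardn := pvComp_card_le (g := pvG layout w) (w := w) (n := layout.length * w) k
        obtain ⟨sn', hflood, hsn'⟩ := pvFlood_spec layout w hw (pvG layout w k) k hkn rfl hgk
          (pvSk (pvG layout w) w (layout.length * w) k) pvSk_closed hseen
          (layout.length * w + 1) {k} [(((k % w : Nat) : Int), ((k / w : Nat) : Int))]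
          (pvSetSeen sn ((k / w : Nat) : Int) ((k % w : Nat) : Int)) 0
          (Finset.singleton_subset_iff.mpr hcm) (Finset.mem_singleton_self k) hsn1
          (by
            intro p hp
            rw [List.mem_singleton] at hp
            subst hp
            dsimp only
            refine ⟨by positivity, by exact_mod_cast hxw, by positivity, by exact_mod_cast hyh, ?_⟩
            simp only [pvToIdx, Int.toNat_natCast, Finset.mem_singleton]
            omega)
          (by simp)
          (by
            intro v hv hvmap
            rw [Finset.mem_singleton] at hv
            subst hv
            exfalso
            apply hvmap
            simp only [List.map_cons, List.map_nil, List.mem_singleton, pvToIdx, Int.toNat_natCast]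
            omega)
          (by simp only [List.length_singleton, Finset.card_singleton]; omega)
        refine ⟨sn', ?_, ?_⟩
        · rw [hstep, pvABody, if_neg hF]
          simp only [hpid]
          rw [if_neg hgk]
          have hflood' : pvFloodA layout (w : Int) ((layout.length : Int)) (pvG layout w k)
              (layout.length * w + 1) [(((k % w : Nat) : Int), ((k / w : Nat) : Int))]
              (pvSetSeen sn ((k / w : Nat) : Int) ((k % w : Nat) : Int)) 0
              = (sn', ((pvComp (pvG layout w) w (layout.length * w) k).card : Int)) := by
            rw [hflood]
            congr 1
            simp only [List.length_singleton, Finset.card_singleton]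
            push_cast
            omega
          rw [hstepR, if_neg (by push_neg; exact ⟨hgk, hrep⟩)]
          simp only [hflood']
        · rw [pvSk_succ_flood hgk]
          exact hsn'


/- ---------- the B side: label merging ---------- -/

def pvEk (g : Nat → String) (w n k : Nat) (i j : Nat) : Prop := pvEdge g w n i j ∧ i < k

def pvMInv (n : Nat) (R : Nat → Nat → Prop) (label : List Nat)
    (members : PySem.Dict Nat (List Nat)) : Prop :=
  label.length = n ∧
  (∀ i, i < n → ∃ M, members.get? (label.getD i 0) = some M ∧ M.Nodup ∧
    (∀ j, j ∈ M ↔ j < n ∧ label.getD j 0 = label.getD i 0)) ∧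
  (∀ i j, i < n → j < n → (label.getD i 0 = label.getD j 0 ↔ R i j))

theorem pvMInv_congr {n : Nat} {R R' : Nat → Nat → Prop} (h : ∀ i j, R i j ↔ R' i j)
    {label : List Nat} {members : PySem.Dict Nat (List Nat)}
    (hInv : pvMInv n R label members) : pvMInv n R' label members :=
  ⟨hInv.1, hInv.2.1, fun i j hi hj => (hInv.2.2 i j hi hj).trans (h i j)⟩

theorem pvMerge_inv {n : Nat} {R : Nat → Nat → Prop} (hR : Equivalence R)
    {label : List Nat} {members : PySem.Dict Nat (List Nat)} {a b : Nat}
    (ha : a < n) (hb : b < n) (hInv : pvMInv n R label members) :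
    pvMInv n (pvJoin R a b) (pvMergeB label members a b).1 (pvMergeB label members a b).2 := by
  obtain ⟨hlen, hmem, hchar⟩ := hInv
  by_cases heq : label.getD a 0 = label.getD b 0
  · have hRab : R a b := (hchar a b ha hb).mp heq
    have hJ : ∀ i j, R i j ↔ pvJoin R a b i j := by
      intro i j
      constructor
      · exact fun h => Or.inl h
      · rintro (h | ⟨h1, h2⟩ | ⟨h1, h2⟩)
        · exact h
        · exact hR.trans h1 (hR.trans hRab h2)
        · exact hR.trans h1 (hR.trans (hR.symm hRab) h2)
    have hid : pvMergeB label members a b = (label, members) := by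
      rw [pvMergeB, if_pos heq]
    rw [hid]
    exact pvMInv_congr hJ ⟨hlen, hmem, hchar⟩
  · obtain ⟨Ma, hMa, hMaN, hMaM⟩ := hmem a ha
    obtain ⟨Mb, hMb, hMbN, hMbM⟩ := hmem b hb
    have hgetMa : members.getD (label.getD a 0) [] = Ma := by
      rw [PySem.Dict.getD_eq_get?_getD, hMa]; rfl
    have hgetMb : members.getD (label.getD b 0) [] = Mb := by
      rw [PySem.Dict.getD_eq_get?_getD, hMb]; rfl
    have hmerge : pvMergeB label members a b
        = (Mb.foldl (fun lab c => lab.set c (label.getD a 0)) label,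
           (members.insert (label.getD a 0) (Ma ++ Mb)).erase (label.getD b 0)) := by
      rw [pvMergeB, if_neg heq, hgetMb, hgetMa]
    rw [hmerge]
    -- the new label of each cell
    have hMbn : ∀ t ∈ Mb, t < n := fun t ht => ((hMbM t).mp ht).1
    have hL' : ∀ t, (Mb.foldl (fun lab c => lab.set c (label.getD a 0)) label).getD t 0
        = if label.getD t 0 = label.getD b 0 ∧ t < n then label.getD a 0 else label.getD t 0 := by
      intro t
      rw [pvFoldlSet_getD, hlen]
      by_cases htn : t < n
      · by_cases htb : label.getD t 0 = label.getD b 0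
        · rw [if_pos ⟨(hMbM t).mpr ⟨htn, htb⟩, htn⟩, if_pos ⟨htb, htn⟩]
        · rw [if_neg (fun hc => htb ((hMbM t).mp hc.1).2), if_neg (fun hc => htb hc.1)]
      · rw [if_neg (fun hc => htn hc.2), if_neg (fun hc => htn hc.2)]
    have hRb : ∀ t, t < n → (label.getD t 0 = label.getD b 0 ↔ R t b) := fun t ht => hchar t b ht hb
    have hRa : ∀ t, t < n → (label.getD t 0 = label.getD a 0 ↔ R t a) := fun t ht => hchar t a ht ha
    have hnRab : ¬ R a b := fun h => heq ((hchar a b ha hb).mpr h)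
    have hLa' : ∀ t, t < n → ((Mb.foldl (fun lab c => lab.set c (label.getD a 0)) label).getD t 0
        = label.getD a 0 ↔ (R t a ∨ R t b)) := by
      intro t ht
      rw [hL']
      by_cases htb : label.getD t 0 = label.getD b 0
      · rw [if_pos ⟨htb, ht⟩]
        exact ⟨fun _ => Or.inr ((hRb t ht).mp htb), fun _ => rfl⟩
      · rw [if_neg (fun hc => htb hc.1)]
        constructor
        · intro h; exact Or.inl ((hRa t ht).mp h)
        · rintro (h | h)
          · exact (hRa t ht).mpr h
          · exact absurd ((hRb t ht).mpr h) htb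
    refine ⟨by rw [pvFoldlSet_length]; exact hlen, ?_, ?_⟩
    · -- member lists
      intro i hi
      by_cases hia : (Mb.foldl (fun lab c => lab.set c (label.getD a 0)) label).getD i 0
          = label.getD a 0
      · refine ⟨Ma ++ Mb, ?_, ?_, ?_⟩
        · dsimp only
          rw [hia, pvDict_get?_erase_of_ne _ _ _ heq, PySem.Dict.get?_insert_self]
        · rw [List.nodup_append]
          refine ⟨hMaN, hMbN, ?_⟩
          intro t hta u htu
          intro hc
          subst hc
          exact heq ((((hMaM t).mp hta).2).symm.trans (((hMbM t).mp htu).2))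
        · intro j
          rw [List.mem_append, hMaM, hMbM]
          constructor
          · rintro (⟨hj, he⟩ | ⟨hj, he⟩)
            · refine ⟨hj, ?_⟩
              rw [hia, (hLa' j hj)]
              exact Or.inl ((hRa j hj).mp he)
            · refine ⟨hj, ?_⟩
              rw [hia, (hLa' j hj)]
              exact Or.inr ((hRb j hj).mp he)
          · rintro ⟨hj, he⟩
            rw [hia] at he
            rcases (hLa' j hj).mp he with h | h
            · exact Or.inl ⟨hj, (hRa j hj).mpr h⟩
            · exact Or.inr ⟨hj, (hRb j hj).mpr h⟩
      · -- the label class is untouched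
        have hLi : (Mb.foldl (fun lab c => lab.set c (label.getD a 0)) label).getD i 0
            = label.getD i 0 := by
          rw [hL']
          rw [hL'] at hia
          by_cases htb : label.getD i 0 = label.getD b 0 ∧ i < n
          · rw [if_pos htb] at hia ⊢
            exact absurd rfl hia
          · rw [if_neg htb]
        have hib : label.getD i 0 ≠ label.getD b 0 := by
          intro hc
          rw [hL', if_pos ⟨hc, hi⟩] at hia
          exact hia rfl
        have hia' : label.getD i 0 ≠ label.getD a 0 := by
          rw [hLi] at hia
          exact hia
        obtain ⟨Mi, hMi, hMiN, hMiM⟩ := hmem i hi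
        refine ⟨Mi, ?_, hMiN, ?_⟩
        · dsimp only
          rw [hLi, pvDict_get?_erase_of_ne _ _ _ hib, PySem.Dict.get?_insert_of_ne _ _ hia']
          exact hMi
        · intro j
          rw [hMiM, hLi]
          constructor
          · rintro ⟨hj, he⟩
            refine ⟨hj, ?_⟩
            rw [hL', if_neg (fun hc => hib (he ▸ hc.1))]
            exact he
          · rintro ⟨hj, he⟩
            refine ⟨hj, ?_⟩
            rw [hL'] at he
            by_cases hc : label.getD j 0 = label.getD b 0 ∧ j < n
            · rw [if_pos hc] at he
              exact absurd he.symm hia'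
            · rw [if_neg hc] at he
              exact he
    · -- the characterisation
      intro i j hi hj
      by_cases hib : label.getD i 0 = label.getD b 0 <;>
        by_cases hjb : label.getD j 0 = label.getD b 0
      · rw [hL', hL', if_pos ⟨hib, hi⟩, if_pos ⟨hjb, hj⟩]
        exact ⟨fun _ => Or.inl ((hchar i j hi hj).mp (hib.trans hjb.symm)), fun _ => rfl⟩
      · rw [hL', hL', if_pos ⟨hib, hi⟩, if_neg (fun hc => hjb hc.1)]
        constructor
        · intro he
          exact Or.inr (Or.inr ⟨(hRb i hi).mp hib, (hchar a j ha hj).mp he⟩)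
        · rintro (h | ⟨h1, h2⟩ | ⟨h1, h2⟩)
          · exact absurd (((hchar i j hi hj).mpr h).symm.trans hib) hjb
          · exact absurd ((hRb j hj).mpr (hR.symm h2)) hjb
          · exact (hchar a j ha hj).mpr h2
      · rw [hL', hL', if_neg (fun hc => hib hc.1), if_pos ⟨hjb, hj⟩]
        constructor
        · intro he
          exact Or.inr (Or.inl ⟨(hRa i hi).mp he, (hchar b j hb hj).mp hjb.symm⟩)
        · rintro (h | ⟨h1, h2⟩ | ⟨h1, h2⟩)
          · exact absurd (((hchar i j hi hj).mpr h).trans hjb) hib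
          · exact (hRa i hi).mpr h1
          · exact absurd ((hRb i hi).mpr h1) hib
      · rw [hL', hL', if_neg (fun hc => hib hc.1), if_neg (fun hc => hjb hc.1)]
        rw [hchar i j hi hj]
        constructor
        · exact fun h => Or.inl h
        · rintro (h | ⟨h1, h2⟩ | ⟨h1, h2⟩)
          · exact h
          · exact absurd ((hRb j hj).mpr (hR.symm h2)) hjb
          · exact absurd ((hRb i hi).mpr h1) hib


theorem pvG_at (layout : List (List String)) {w y x : Nat} (hx : x < w) :
    (layout.getD y []).getD x "" = pvG layout w (y * w + x) := by
  simp [pvG, (pvEnc_div hx).1, (pvEnc_div hx).2]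

theorem pvEdge_at (layout : List (List String)) {w : Nat} (hw : 0 < w) {k : Nat}
    (hk : k < layout.length * w) (hgk : pvG layout w k ≠ "") (j : Nat) :
    pvEdge (pvG layout w) w (layout.length * w) k j ↔
      (j = k + 1 ∧ (k % w + 1 < w ∧ (layout.getD (k / w) []).getD (k % w + 1) "" = pvG layout w k)) ∨
      (j = k + w ∧ (k / w + 1 < layout.length ∧ (layout.getD (k / w + 1) []).getD (k % w) "" = pvG layout w k)) := by
  rcases pvDec hw hk with ⟨hyh, hxw, henc⟩
  have hmulS : (k / w + 1) * w = k / w * w + w := Nat.succ_mul _ _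
  constructor
  · rintro ⟨-, hjn, -, hgeq, (⟨rfl, hmod⟩ | rfl)⟩
    · refine Or.inl ⟨rfl, hmod, ?_⟩
      have he : k + 1 = k / w * w + (k % w + 1) := by omega
      rw [pvG_at layout hmod, ← he, ← hgeq]
    · refine Or.inr ⟨rfl, ?_, ?_⟩
      · by_contra hcon
        have h1 : layout.length * w ≤ (k / w + 1) * w := Nat.mul_le_mul_right w (by omega)
        omega
      · have he : k + w = (k / w + 1) * w + k % w := by omega
        rw [pvG_at layout hxw, ← he, ← hgeq]
  · rintro (⟨rfl, hmod, hcell⟩ | ⟨rfl, hyh1, hcell⟩)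
    · have he : k + 1 = k / w * w + (k % w + 1) := by omega
      rw [pvG_at layout hmod, ← he] at hcell
      exact ⟨hk, by
        have := pvEnc_lt (w := w) hyh hmod
        omega, hgk, hcell.symm, Or.inl ⟨rfl, hmod⟩⟩
    · have he : k + w = (k / w + 1) * w + k % w := by omega
      rw [pvG_at layout hxw, ← he] at hcell
      exact ⟨hk, by
        have := pvEnc_lt (w := w) hyh1 hxw
        omega, hgk, hcell.symm, Or.inr rfl⟩

theorem pvInit_get? (n i : Nat) (hi : i < n) :
    ((List.range n).foldl (fun d j => d.insert j [j]) PySem.Dict.empty).get? i = some [i] := by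
  have hitems := PySem.Dict.items_foldl_insert_fresh (List.range n) (fun j => j) (fun j => [j])
    PySem.Dict.empty (fun a _ => PySem.Dict.contains_empty a) (by simpa using List.nodup_range)
  have hnd : ((List.range n).foldl (fun d j => d.insert j [j]) PySem.Dict.empty).keys.Nodup :=
    PySem.Dict.nodup_keys_foldl_insert _ (fun _ j => [j]) _ (by rw [PySem.Dict.keys_empty]; exact List.nodup_nil)
  apply PySem.Dict.get?_of_mem_items _ _ hnd
  rw [hitems]
  simp only [List.mem_append, List.mem_map, List.mem_range]
  exact Or.inr ⟨i, hi, rfl⟩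

def pvBBody (layout : List (List String)) (w : Nat) :
    (List Nat × PySem.Dict Nat (List Nat)) → Nat → Nat → (List Nat × PySem.Dict Nat (List Nat)) :=
  fun st y x =>
    let pid := (layout.getD y []).getD x ""
    if pid = "" then st
    else
      let i := y * w + x
      let st1 := if x + 1 < w ∧ (layout.getD y []).getD (x + 1) "" = pid then
          pvMergeB st.1 st.2 i (i + 1) else st
      if y + 1 < layout.length ∧ (layout.getD (y + 1) []).getD x "" = pid then
        pvMergeB st1.1 st1.2 i (i + w) else st1

theorem pvBFold (layout : List (List String)) (w : Nat) (hw : 0 < w) :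
    ∀ k, k ≤ layout.length * w →
    pvMInv (layout.length * w)
      (Relation.EqvGen (pvEk (pvG layout w) w (layout.length * w) k))
      ((List.range k).foldl (fun st i => pvBBody layout w st (i / w) (i % w))
        (List.range (layout.length * w),
         (List.range (layout.length * w)).foldl (fun d i => d.insert i [i]) PySem.Dict.empty)).1
      ((List.range k).foldl (fun st i => pvBBody layout w st (i / w) (i % w))
        (List.range (layout.length * w),
         (List.range (layout.length * w)).foldl (fun d i => d.insert i [i]) PySem.Dict.empty)).2 := by
  intro k
  induction k with
  | zero =>
    intro _
    refine ⟨by simp, ?_, ?_⟩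
    · intro i hi
      simp only [List.range_zero, List.foldl_nil]
      rw [pvGetD_range hi]
      refine ⟨[i], pvInit_get? _ i hi, List.nodup_singleton i, ?_⟩
      intro j
      rw [List.mem_singleton]
      constructor
      · rintro rfl; exact ⟨hi, pvGetD_range hi⟩
      · rintro ⟨hj, he⟩
        rw [pvGetD_range hj] at he
        exact he
    · intro i j hi hj
      simp only [List.range_zero, List.foldl_nil]
      rw [pvGetD_range hi, pvGetD_range hj]
      have hcong : ∀ x y : Nat, pvEk (pvG layout w) w (layout.length * w) 0 x y ↔ False := by
        intro x y
        simp [pvEk]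
      rw [pvEqvGen_congr hcong, pvEqvGen_empty]
  | succ k ih =>
    intro hk1
    have hkn : k < layout.length * w := by omega
    rcases pvDec hw hkn with ⟨hyh, hxw, henc⟩
    have hMk := ih (by omega)
    set stk := ((List.range k).foldl (fun st i => pvBBody layout w st (i / w) (i % w))
        (List.range (layout.length * w),
         (List.range (layout.length * w)).foldl (fun d i => d.insert i [i]) PySem.Dict.empty))
      with hstk
    have hstep : ((List.range (k + 1)).foldl (fun st i => pvBBody layout w st (i / w) (i % w))
        (List.range (layout.length * w),
         (List.range (layout.length * w)).foldl (fun d i => d.insert i [i]) PySem.Dict.empty))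
        = pvBBody layout w stk (k / w) (k % w) := by
      rw [List.range_succ, List.foldl_append, List.foldl_cons, List.foldl_nil, hstk]
    rw [hstep]
    by_cases hgk : pvG layout w k = ""
    · have hbody : pvBBody layout w stk (k / w) (k % w) = stk := by
        rw [pvBBody]
        dsimp only
        rw [show (layout.getD (k / w) []).getD (k % w) "" = pvG layout w k from rfl, if_pos hgk]
      rw [hbody]
      refine pvMInv_congr ?_ hMk
      intro i j
      apply pvEqvGen_congr
      intro x y
      constructor
      · rintro ⟨he, hx⟩; exact ⟨he, by omega⟩
      · rintro ⟨he, hx⟩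
        refine ⟨he, ?_⟩
        rcases Nat.lt_succ_iff_lt_or_eq.mp hx with hx | rfl
        · exact hx
        · exact absurd hgk he.2.2.1
    · have hbody : pvBBody layout w stk (k / w) (k % w)
          = (if k / w + 1 < layout.length ∧
                (layout.getD (k / w + 1) []).getD (k % w) "" = pvG layout w k then
              pvMergeB
                (if k % w + 1 < w ∧ (layout.getD (k / w) []).getD (k % w + 1) "" = pvG layout w k then
                  pvMergeB stk.1 stk.2 k (k + 1) else stk).1
                (if k % w + 1 < w ∧ (layout.getD (k / w) []).getD (k % w + 1) "" = pvG layout w k then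
                  pvMergeB stk.1 stk.2 k (k + 1) else stk).2 k (k + w)
             else (if k % w + 1 < w ∧ (layout.getD (k / w) []).getD (k % w + 1) "" = pvG layout w k then
                  pvMergeB stk.1 stk.2 k (k + 1) else stk)) := by
        rw [pvBBody]
        dsimp only
        rw [show (layout.getD (k / w) []).getD (k % w) "" = pvG layout w k from rfl, if_neg hgk, henc]
      rw [hbody]
      -- relation after the optional right merge
      have h1 : pvMInv (layout.length * w)
          (Relation.EqvGen (fun i j => pvEk (pvG layout w) w (layout.length * w) k i j ∨
            ((k % w + 1 < w ∧ (layout.getD (k / w) []).getD (k % w + 1) "" = pvG layout w k)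
              ∧ i = k ∧ j = k + 1)))
          (if k % w + 1 < w ∧ (layout.getD (k / w) []).getD (k % w + 1) "" = pvG layout w k then
            pvMergeB stk.1 stk.2 k (k + 1) else stk).1
          (if k % w + 1 < w ∧ (layout.getD (k / w) []).getD (k % w + 1) "" = pvG layout w k then
            pvMergeB stk.1 stk.2 k (k + 1) else stk).2 := by
        by_cases hGr : k % w + 1 < w ∧ (layout.getD (k / w) []).getD (k % w + 1) "" = pvG layout w k
        · rw [if_pos hGr]
          have hb : k + 1 < layout.length * w := by
            have := pvEnc_lt (w := w) hyh hGr.1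
            omega
          have hm := pvMerge_inv (Relation.EqvGen.is_equivalence _) hkn hb hMk
          refine pvMInv_congr ?_ hm
          intro i j
          rw [← pvEqvGen_union_pair]
          apply pvEqvGen_congr
          intro x y
          constructor
          · rintro (he | ⟨rfl, rfl⟩)
            · exact Or.inl he
            · exact Or.inr ⟨hGr, rfl, rfl⟩
          · rintro (he | ⟨-, rfl, rfl⟩)
            · exact Or.inl he
            · exact Or.inr ⟨rfl, rfl⟩
        · rw [if_neg hGr]
          refine pvMInv_congr ?_ hMk
          intro i j
          apply pvEqvGen_congr
          intro x y
          constructor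
          · exact fun he => Or.inl he
          · rintro (he | ⟨hg, -, -⟩)
            · exact he
            · exact absurd hg hGr
      -- relation after the optional down merge
      have h2 : pvMInv (layout.length * w)
          (Relation.EqvGen (fun i j =>
            (pvEk (pvG layout w) w (layout.length * w) k i j ∨
              ((k % w + 1 < w ∧ (layout.getD (k / w) []).getD (k % w + 1) "" = pvG layout w k)
                ∧ i = k ∧ j = k + 1)) ∨
            ((k / w + 1 < layout.length ∧ (layout.getD (k / w + 1) []).getD (k % w) "" = pvG layout w k)
              ∧ i = k ∧ j = k + w)))
          (pvBBody layout w stk (k / w) (k % w)).1 (pvBBody layout w stk (k / w) (k % w)).2 := by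
        rw [hbody]
        by_cases hGd : k / w + 1 < layout.length ∧
            (layout.getD (k / w + 1) []).getD (k % w) "" = pvG layout w k
        · rw [if_pos hGd]
          have hb : k + w < layout.length * w := by
            have := pvEnc_lt (w := w) hGd.1 hxw
            have hms : (k / w + 1) * w = k / w * w + w := Nat.succ_mul _ _
            omega
          have hm := pvMerge_inv (Relation.EqvGen.is_equivalence _) hkn hb h1
          refine pvMInv_congr ?_ hm
          intro i j
          rw [← pvEqvGen_union_pair]
          apply pvEqvGen_congr
          intro x y
          constructor
          · rintro (he | ⟨rfl, rfl⟩)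
            · exact Or.inl he
            · exact Or.inr ⟨hGd, rfl, rfl⟩
          · rintro (he | ⟨-, rfl, rfl⟩)
            · exact Or.inl he
            · exact Or.inr ⟨rfl, rfl⟩
        · rw [if_neg hGd]
          refine pvMInv_congr ?_ h1
          intro i j
          apply pvEqvGen_congr
          intro x y
          constructor
          · exact fun he => Or.inl he
          · rintro (he | ⟨hg, -, -⟩)
            · exact he
            · exact absurd hg hGd
      rw [hbody] at h2
      refine pvMInv_congr ?_ h2
      intro i j
      apply pvEqvGen_congr
      intro x y
      constructor
      · rintro ((⟨he, hx⟩ | ⟨hGr, rfl, rfl⟩) | ⟨hGd, rfl, rfl⟩)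
        · exact ⟨he, by omega⟩
        · exact ⟨(pvEdge_at layout hw hkn hgk _).mpr (Or.inl ⟨rfl, hGr⟩), by omega⟩
        · exact ⟨(pvEdge_at layout hw hkn hgk _).mpr (Or.inr ⟨rfl, hGd⟩), by omega⟩
      · rintro ⟨he, hx⟩
        rcases Nat.lt_succ_iff_lt_or_eq.mp hx with hx | rfl
        · exact Or.inl (Or.inl ⟨he, hx⟩)
        · rcases (pvEdge_at layout hw hkn hgk _).mp he with ⟨rfl, hGr⟩ | ⟨rfl, hGd⟩
          · exact Or.inl (Or.inr ⟨hGr, rfl, rfl⟩)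
          · exact Or.inr ⟨hGd, rfl, rfl⟩


/- ---------- putting the two sides together ---------- -/

theorem pvA_result (layout : List (List String)) (hne : layout ≠ [])
    (hw : 0 < (layout.headD []).length) :
    largest_cluster_py layout
      = (pvBestR (pvG layout (layout.headD []).length) (layout.headD []).length
          (layout.length * (layout.headD []).length)
          (List.range (layout.length * (layout.headD []).length))).items := by
  obtain ⟨sn, heq, -⟩ :=
    pvAFold layout (layout.headD []).length hw (layout.length * (layout.headD []).length) le_rfl
  have hport : largest_cluster_py layout
      = ((List.range layout.length).foldl (fun st y =>
          (List.range (layout.headD []).length).foldl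
            (fun st x => pvABody layout (layout.headD []).length st y x) st)
          (List.replicate layout.length (List.replicate (layout.headD []).length false),
           PySem.Dict.empty)).2.items := by
    rw [largest_cluster_py, if_neg hne]
    rfl
  rw [hport, pvDoubleFold (pvABody layout (layout.headD []).length), heq]

theorem pvB_result (layout : List (List String)) (hne : layout ≠ [])
    (hw : 0 < (layout.headD []).length) :
    largest_cluster_py_alt layout
      = (pvBest (pvG layout (layout.headD []).length) (layout.headD []).length
          (layout.length * (layout.headD []).length)
          (List.range (layout.length * (layout.headD []).length))).items := by
  have hInv := pvBFold layout (layout.headD []).length hw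
    (layout.length * (layout.headD []).length) le_rfl
  set g := pvG layout (layout.headD []).length with hg
  set w := (layout.headD []).length with hwdef
  set n := layout.length * (layout.headD []).length with hn
  set stf := ((List.range n).foldl (fun st i => pvBBody layout w st (i / w) (i % w))
      (List.range n, (List.range n).foldl (fun d i => d.insert i [i]) PySem.Dict.empty))
    with hstf
  set stf0 := ((List.range layout.length).foldl (fun st y =>
      (List.range w).foldl (fun st x => pvBBody layout w st y x) st)
      (List.range n, (List.range n).foldl (fun d i => d.insert i [i]) PySem.Dict.empty))
    with hstf0
  have hD : stf0 = stf := by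
    rw [hstf0, hstf, hn]
    exact pvDoubleFold (pvBBody layout w) layout.length w _
  have hReach : ∀ i j, i < n → j < n →
      (stf.1.getD i 0 = stf.1.getD j 0 ↔ pvReach g w n i j) := by
    intro i j hi hj
    rw [hInv.2.2 i j hi hj]
    rw [pvEqvGen_congr (F := pvEdge g w n) (fun x y =>
      ⟨fun h => h.1, fun h => ⟨h, by exact h.1⟩⟩)]
    exact pvEqvGen_edge_iff_reach
  have hport : largest_cluster_py_alt layout
      = ((List.range layout.length).foldl (fun b y =>
          (List.range w).foldl (fun (b : PySem.Dict String Int) x =>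
            let pid := (layout.getD y []).getD x ""
            if pid = "" then b
            else b.insert pid (max (b.getD pid 0)
              ((stf0.2.getD (stf0.1.getD (y * w + x) 0) []).length : Int))) b)
          PySem.Dict.empty).items := by
    rw [largest_cluster_py_alt, if_neg hne]
    rfl
  rw [hD] at hport
  rw [hport, pvDoubleFold (fun (b : PySem.Dict String Int) y x =>
    let pid := (layout.getD y []).getD x ""
    if pid = "" then b
    else b.insert pid (max (b.getD pid 0)
      ((stf.2.getD (stf.1.getD (y * w + x) 0) []).length : Int)))]
  congr 1
  rw [pvBest]
  apply PySem.List.foldl_congr_mem'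
  intro i hi b
  have hin : i < n := List.mem_range.mp hi
  rcases pvDec hw hin with ⟨hyh, hxw, henc⟩
  dsimp only
  rw [show (layout.getD (i / w) []).getD (i % w) "" = g i from rfl, henc]
  by_cases hgi : g i = ""
  · rw [if_pos hgi, if_pos hgi]
  · rw [if_neg hgi, if_neg hgi]
    obtain ⟨M, hget, hndM, hmemM⟩ := hInv.2.1 i hin
    have hgetD : stf.2.getD (stf.1.getD i 0) [] = M := by
      rw [PySem.Dict.getD_eq_get?_getD, hget]; rfl
    have hMfin : M.toFinset = pvComp g w n i := by
      ext j
      rw [List.mem_toFinset, hmemM j, pvMem_comp]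
      constructor
      · rintro ⟨hj, he⟩
        exact ⟨hj, pvReach_symm ((hReach j i hj hin).mp he)⟩
      · rintro ⟨hj, hr⟩
        exact ⟨hj, (hReach j i hj hin).mpr (pvReach_symm hr)⟩
    have hlen : M.length = (pvComp g w n i).card := by
      rw [← hMfin, List.toFinset_card_of_nodup hndM]
    rw [hgetD, hlen]

-- ===== VERDICT (by name: the statement is the Claim_ definition above) =====
theorem largest_cluster_py_spec : Claim_equal_largest_cluster_py := by
  unfold Claim_equal_largest_cluster_py Spec_largest_cluster_py
  intro layout _ _
  by_cases hne : layout = []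
  · subst hne; rfl
  · by_cases hw : 0 < (layout.headD []).length
    · rw [pvA_result layout hne hw, pvB_result layout hne hw, pvBestR_eq_pvBest]
    · have hw0 : (layout.headD []).length = 0 := by omega
      rw [largest_cluster_py, largest_cluster_py_alt, if_neg hne, if_neg hne]
      simp only [hw0, Nat.mul_zero, List.range_zero, List.foldl_nil]
      rw [PySem.List.foldl_ignore, PySem.List.foldl_ignore]
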